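-- pv_equiv track=rewrite | github.com/inaciovasquez2020/pachner-invariant | pachner_invariant/g2_outbound.py | _rref_f2
-- ===== SOURCE A (Python) =====
-- def _rref_f2(matrix: list[list[int]]) -> tuple[int, list[int], list[list[int]]]:
--     if not matrix:
--         return 0, [], []
--     a = [[int(x) & 1 for x in row] for row in matrix]
--     nrows = len(a)
--     ncols = len(a[0])
--     r = 0
--     pivots: list[int] = []
--     for c in range(ncols):
--         pivot = None
--         for i in range(r, nrows):
--             if a[i][c]:
--                 pivot = i
--                 break
--         if pivot is None:
--             continue
--         a[r], a[pivot] = a[pivot], a[r]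
--         for i in range(nrows):
--             if i != r and a[i][c]:
--                 a[i] = [u ^ v for u, v in zip(a[i], a[r])]
--         pivots.append(c)
--         r += 1
--         if r == nrows:
--             break
--     basis = [row for row in a if any(row)]
--     return len(basis), pivots, basis
-- ===== SOURCE B (Python) =====
-- def _rref_f2(matrix: list[list[int]]) -> tuple[int, list[int], list[list[int]]]:
--     if not matrix:
--         return 0, [], []
--     # incremental GF(2) basis: a sorted list of (pivot column, fully reduced row).
--     basis: list[tuple[int, list[int]]] = []
--     for row in matrix:
--         cur = [x & 1 for x in row]
--         # reduce the incoming row against the basis (each basis row is already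
--         # zero at every other pivot, so one pass clears all pivot columns)
--         for p, b in basis:
--             if cur[p]:
--                 cur = [u ^ v for u, v in zip(cur, b)]
--         lead = next((c for c, x in enumerate(cur) if x), None)
--         if lead is None:
--             continue
--         # keep the basis fully reduced: clear the new pivot column everywhere
--         basis = [(p, [u ^ v for u, v in zip(b, cur)] if b[lead] else b)
--                  for p, b in basis]
--         i = 0
--         while i < len(basis) and basis[i][0] < lead:
--             i += 1
--         basis.insert(i, (lead, cur))
--     pivots = [p for p, _ in basis]
--     rows = [b for _, b in basis]
--     return len(basis), pivots, rows
-- ===== Notes on version B (the rewrite author's own statement) =====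
-- stated objective: alternative
-- what changed: B replaces A's column-sweep Gauss-Jordan (pivot search among remaining rows, row swaps, whole-column elimination, rank counter, final zero-row filter) with a single pass over the rows that maintains an incrementally fully-reduced GF(2) basis as a sorted (pivot column -> row) association list; outputs agree because both compute the unique RREF basis of the row space. Pre_ admits matrices whose odd rows all have the first row's width and no row narrower than the first (wider rows must be even, hence zero over GF(2)); …
-- outside the precondition, e.g. on _rref_f2([[], [], [1, 0], [0]]): A returns (1, [], [[1, 0]]), B returns (1, [0], [[1, 0]])
import Mathlib
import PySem

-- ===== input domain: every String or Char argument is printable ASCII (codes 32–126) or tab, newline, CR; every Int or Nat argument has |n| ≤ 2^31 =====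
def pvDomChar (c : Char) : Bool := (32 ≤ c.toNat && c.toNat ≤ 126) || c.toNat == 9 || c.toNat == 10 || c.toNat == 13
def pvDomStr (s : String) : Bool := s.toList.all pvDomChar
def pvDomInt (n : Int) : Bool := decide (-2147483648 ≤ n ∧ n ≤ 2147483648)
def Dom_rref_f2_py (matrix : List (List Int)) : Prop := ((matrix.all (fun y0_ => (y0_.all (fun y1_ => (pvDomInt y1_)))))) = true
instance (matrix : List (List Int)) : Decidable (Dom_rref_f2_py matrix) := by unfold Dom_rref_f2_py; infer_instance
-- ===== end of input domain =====

-- B replaces A's column-sweep Gauss-Jordan with a single pass over the rows that maintains an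
-- incrementally fully-reduced GF(2) basis (a sorted pivot-column → row association list);
-- both compute the unique reduced row-echelon basis of the row space.

-- ===== PORT A =====
-- for i in range(r, nrows): if a[i][c]: pivot = i; break
def pvFindPivotA (a : List (List Int)) (c : Nat) : List Nat → Option Nat
  | [] => none
  | i :: is => if (a.getD i []).getD c 0 ≠ 0 then some i else pvFindPivotA a c is

-- for i in range(nrows): if i != r and a[i][c]: a[i] = [u ^ v for u, v in zip(a[i], a[r])]
def pvElimA (r c : Nat) : List Nat → List (List Int) → List (List Int)
  | [], a => a
  | i :: is, a =>
      pvElimA r c is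
        (if i ≠ r ∧ (a.getD i []).getD c 0 ≠ 0
         then a.set i (List.zipWith (fun u v => PySem.Int.bxor u v) (a.getD i []) (a.getD r []))
         else a)

-- the `for c in range(ncols)` loop of A, with the early `break` at r == nrows
def pvLoopA (nrows : Nat) : List Nat → List (List Int) → Nat → List Int →
    List (List Int) × Nat × List Int
  | [], a, r, pivots => (a, r, pivots)
  | c :: cs, a, r, pivots =>
    match pvFindPivotA a c (List.range' r (nrows - r)) with
    | none => pvLoopA nrows cs a r pivots
    | some p =>
      let tr := a.getD r []
      let tp := a.getD p []
      let a1 := (a.set r tp).set p tr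
      let a2 := pvElimA r c (List.range nrows) a1
      let pivots' := pivots ++ [(c : Int)]
      if r + 1 = nrows then (a2, r + 1, pivots') else pvLoopA nrows cs a2 (r + 1) pivots'

def rref_f2_py (matrix : List (List Int)) : Int × List Int × List (List Int) :=
  if matrix = [] then (0, [], [])
  else
    let a := matrix.map (fun row => row.map (fun x => PySem.Int.band x 1))
    let nrows := a.length
    let ncols := (a.headD []).length
    let res := pvLoopA nrows (List.range ncols) a 0 []
    let basis := res.1.filter (fun row => row.any (fun x => x != 0))
    ((basis.length : Int), res.2.2, basis)

-- ===== PORT B =====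
-- [u ^ v for u, v in zip(u, v)]
def pvXor (u v : List Int) : List Int := List.zipWith (fun a b => PySem.Int.bxor a b) u v

-- for p, b in basis: if cur[p]: cur = cur ^ b
def pvReduceB (basis : List (Nat × List Int)) (cur : List Int) : List Int :=
  basis.foldl (fun cur pb => if cur.getD pb.1 0 ≠ 0 then pvXor cur pb.2 else cur) cur

-- next((c for c, x in enumerate(cur) if x), None)
def pvLeadB : List Int → Nat → Option Nat
  | [], _ => none
  | x :: xs, c => if x ≠ 0 then some c else pvLeadB xs (c + 1)

-- i = 0; while i < len(basis) and basis[i][0] < lead: i += 1; basis.insert(i, (lead, cur))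
def pvInsertB (lead : Nat) (cur : List Int) : List (Nat × List Int) → List (Nat × List Int)
  | [] => [(lead, cur)]
  | pb :: t => if pb.1 < lead then pb :: pvInsertB lead cur t else (lead, cur) :: pb :: t

-- one row of the main loop of B
def pvStepB (basis : List (Nat × List Int)) (row : List Int) : List (Nat × List Int) :=
  let cur := pvReduceB basis (row.map (fun x => PySem.Int.band x 1))
  match pvLeadB cur 0 with
  | none => basis
  | some lead =>
      pvInsertB lead cur
        (basis.map (fun pb => (pb.1, if pb.2.getD lead 0 ≠ 0 then pvXor pb.2 cur else pb.2)))

def rref_f2_py_alt (matrix : List (List Int)) : Int × List Int × List (List Int) :=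
  if matrix = [] then (0, [], [])
  else
    let basis := matrix.foldl pvStepB []
    ((basis.length : Int), basis.map (fun pb => ((pb.1 : Nat) : Int)), basis.map Prod.snd)

-- ===== PRECONDITION & SPEC =====
-- Pre_ admits the matrices whose odd (information-carrying) rows all have the first row's width
-- and in which no row is narrower than the first (wider rows must be even, i.e. zero over GF(2));
-- on the remaining ragged inputs A either raises IndexError while scanning a column, or returns
-- values shaped by zip()-truncation accidents that are artefacts of its implementation.
def Pre_rref_f2_py (matrix : List (List Int)) : Prop :=
  ∀ row ∈ matrix, (matrix.headD []).length ≤ row.length ∧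
    (row.length = (matrix.headD []).length ∨ ∀ x ∈ row, PySem.Int.band x 1 = 0)
instance (matrix : List (List Int)) : Decidable (Pre_rref_f2_py matrix) := by
  unfold Pre_rref_f2_py; infer_instance

def pvWitness_rref_f2_py : List (List Int) := [[1, 0], [1, 1]]

def Spec_rref_f2_py (matrix : List (List Int)) (out : Int × List Int × List (List Int)) : Prop :=
  out = rref_f2_py_alt matrix
instance (matrix : List (List Int)) (out : Int × List Int × List (List Int)) :
    Decidable (Spec_rref_f2_py matrix out) := by unfold Spec_rref_f2_py; infer_instance

-- ===== CLAIM (what is proved, stated in full; the proofs are below) =====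
def Claim_equal_rref_f2_py : Prop :=
  ∀ (matrix : List (List Int)), Dom_rref_f2_py matrix → Pre_rref_f2_py matrix →
    Spec_rref_f2_py matrix (rref_f2_py matrix)

-- ===== LEMMAS AND PROOFS =====

-- ---------- rows over GF(2) ----------
def pvGoodRow (n : Nat) (v : List Int) : Prop := v.length = n ∧ ∀ x ∈ v, x = 0 ∨ x = 1

def pvZeroRow (n : Nat) : List Int := List.replicate n 0

lemma pv_band01 (x : Int) : PySem.Int.band x 1 = 0 ∨ PySem.Int.band x 1 = 1 := by
  rw [PySem.Int.band_one]
  unfold PySem.Int.mod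
  rw [Int.fmod_eq_emod]
  · omega

lemma pv_bxor01 (x y : Int) (hx : x = 0 ∨ x = 1) (hy : y = 0 ∨ y = 1) :
    PySem.Int.bxor x y = 0 ∨ PySem.Int.bxor x y = 1 := by
  rcases hx with hx | hx <;> rcases hy with hy | hy <;> subst hx <;> subst hy <;> decide

lemma pv_bxor_assoc01 (x y z : Int) (hx : x = 0 ∨ x = 1) (hy : y = 0 ∨ y = 1)
    (hz : z = 0 ∨ z = 1) :
    PySem.Int.bxor (PySem.Int.bxor x y) z = PySem.Int.bxor x (PySem.Int.bxor y z) := by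
  rcases hx with hx | hx <;> rcases hy with hy | hy <;> rcases hz with hz | hz <;>
    subst hx <;> subst hy <;> subst hz <;> decide

lemma pv_mem_zipWith {α β γ : Type} (f : α → β → γ) (l1 : List α) (l2 : List β) (x : γ)
    (h : x ∈ List.zipWith f l1 l2) : ∃ a ∈ l1, ∃ b ∈ l2, f a b = x := by
  induction l1 generalizing l2 with
  | nil => simp at h
  | cons a as ih =>
    cases l2 with
    | nil => simp at h
    | cons b bs =>
      simp only [List.zipWith_cons_cons, List.mem_cons] at h
      rcases h with h | h
      · exact ⟨a, by simp, b, by simp, h.symm⟩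
      · obtain ⟨a', ha, b', hb, hx⟩ := ih bs h
        exact ⟨a', by simp [ha], b', by simp [hb], hx⟩

lemma pvZeroRow_good (n : Nat) : pvGoodRow n (pvZeroRow n) := by
  constructor
  · simp [pvZeroRow]
  · intro x hx
    left
    exact List.eq_of_mem_replicate hx

lemma pvZeroRow_getD (n d : Nat) : (pvZeroRow n).getD d 0 = 0 := by
  unfold pvZeroRow
  rcases Nat.lt_or_ge d n with h | h
  · rw [List.getD_eq_getElem _ _ (by simpa using h)]
    simp
  · rw [List.getD_eq_default _ _ (by simpa using h)]

lemma pvGood_getD01 {n : Nat} {v : List Int} (h : pvGoodRow n v) (d : Nat) :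
    v.getD d 0 = 0 ∨ v.getD d 0 = 1 := by
  rcases Nat.lt_or_ge d v.length with hd | hd
  · rw [List.getD_eq_getElem _ _ hd]
    exact h.2 _ (List.getElem_mem hd)
  · rw [List.getD_eq_default _ _ hd]
    left; rfl

lemma pvXor_length (u v : List Int) : (pvXor u v).length = min u.length v.length := by
  simp [pvXor]

lemma pvXor_good {n : Nat} {u v : List Int} (hu : pvGoodRow n u) (hv : pvGoodRow n v) :
    pvGoodRow n (pvXor u v) := by
  constructor
  · rw [pvXor_length, hu.1, hv.1]; omega
  · intro x hx
    obtain ⟨a, ha, b, hb, hab⟩ := pv_mem_zipWith _ _ _ _ hx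
    exact hab ▸ pv_bxor01 a b (hu.2 a ha) (hv.2 b hb)

lemma pvXor_getD {u v : List Int} (h : u.length = v.length) (d : Nat) :
    (pvXor u v).getD d 0 = PySem.Int.bxor (u.getD d 0) (v.getD d 0) := by
  rcases Nat.lt_or_ge d u.length with hd | hd
  · rw [List.getD_eq_getElem _ _ (by rw [pvXor_length]; omega),
      List.getD_eq_getElem _ _ hd, List.getD_eq_getElem _ _ (by omega)]
    simp [pvXor]
  · rw [List.getD_eq_default _ _ (by rw [pvXor_length]; omega),
      List.getD_eq_default _ _ hd, List.getD_eq_default _ _ (by omega)]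
    decide

lemma pvRow_ext {n : Nat} {u v : List Int} (hu : u.length = n) (hv : v.length = n)
    (h : ∀ d, d < n → u.getD d 0 = v.getD d 0) : u = v := by
  apply List.ext_getElem (by omega)
  intro i h1 h2
  have := h i (by omega)
  rwa [List.getD_eq_getElem _ _ h1, List.getD_eq_getElem _ _ h2] at this

lemma pvXor_zeroR {n : Nat} {u : List Int} (hu : pvGoodRow n u) :
    pvXor u (pvZeroRow n) = u := by
  apply pvRow_ext (n := n) _ hu.1
  · intro d hd
    rw [pvXor_getD (by rw [hu.1]; simp [pvZeroRow]), pvZeroRow_getD]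
    simp
  · rw [pvXor_length, hu.1]; simp [pvZeroRow]

lemma pvXor_zeroL {n : Nat} {u : List Int} (hu : pvGoodRow n u) :
    pvXor (pvZeroRow n) u = u := by
  apply pvRow_ext (n := n) _ hu.1
  · intro d hd
    rw [pvXor_getD (by rw [hu.1]; simp [pvZeroRow]), pvZeroRow_getD, PySem.Int.bxor_comm]
    simp
  · rw [pvXor_length, hu.1]; simp [pvZeroRow]

lemma pvXor_self {n : Nat} {u : List Int} (hu : pvGoodRow n u) :
    pvXor u u = pvZeroRow n := by
  apply pvRow_ext (n := n) _ (pvZeroRow_good n).1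
  · intro d hd
    rw [pvXor_getD rfl, pvZeroRow_getD]
    simp
  · rw [pvXor_length, hu.1]; simp

lemma pvXor_assoc {n : Nat} {u v w : List Int} (hu : pvGoodRow n u) (hv : pvGoodRow n v)
    (hw : pvGoodRow n w) : pvXor (pvXor u v) w = pvXor u (pvXor v w) := by
  have huv := pvXor_good hu hv
  have hvw := pvXor_good hv hw
  apply pvRow_ext (n := n) ((pvXor_good huv hw).1) ((pvXor_good hu hvw).1)
  intro d hd
  rw [pvXor_getD (by rw [huv.1, hw.1]), pvXor_getD (by rw [hu.1, hv.1]),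
    pvXor_getD (by rw [hu.1, hvw.1]), pvXor_getD (by rw [hv.1, hw.1])]
  exact pv_bxor_assoc01 _ _ _ (pvGood_getD01 hu d) (pvGood_getD01 hv d) (pvGood_getD01 hw d)

lemma pvXor_comm {u v : List Int} : pvXor u v = pvXor v u := by
  unfold pvXor
  exact List.zipWith_comm_of_comm (fun a b => PySem.Int.bxor_comm a b)

lemma pvXor_cancel {n : Nat} {u v : List Int} (hu : pvGoodRow n u) (hv : pvGoodRow n v) :
    pvXor u (pvXor u v) = v := by
  rw [← pvXor_assoc hu hu hv, pvXor_self hu, pvXor_zeroL hv]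

lemma pvXor_left_comm {n : Nat} {u v w : List Int} (hu : pvGoodRow n u) (hv : pvGoodRow n v)
    (hw : pvGoodRow n w) : pvXor u (pvXor v w) = pvXor v (pvXor u w) := by
  rw [← pvXor_assoc hu hv hw, pvXor_comm (u := u) (v := v), pvXor_assoc hv hu hw]

lemma pvGood_allzero {n : Nat} {v : List Int} (hv : pvGoodRow n v)
    (h : ∀ d, d < n → v.getD d 0 = 0) : v = pvZeroRow n := by
  apply pvRow_ext hv.1 (pvZeroRow_good n).1
  intro d hd
  rw [h d hd, pvZeroRow_getD]

-- rows admitted by Pre_: 0/1 entries, and either exactly width n or an all-zero row at least that wide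
def pvOKRow (n : Nat) (v : List Int) : Prop :=
  (∀ x ∈ v, x = 0 ∨ x = 1) ∧ (v.length = n ∨ (n ≤ v.length ∧ ∀ x ∈ v, x = 0))

lemma pvZero_getD_any {v : List Int} (h : ∀ x ∈ v, x = 0) (d : Nat) : v.getD d 0 = 0 := by
  rcases Nat.lt_or_ge d v.length with hd | hd
  · rw [List.getD_eq_getElem _ _ hd]
    exact h _ (List.getElem_mem hd)
  · rw [List.getD_eq_default _ _ hd]

lemma pvOK_len {n : Nat} {v : List Int} (h : pvOKRow n v) : n ≤ v.length := by
  rcases h.2 with h' | h'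
  · omega
  · exact h'.1

lemma pvTake_getD {n : Nat} {v : List Int} (d : Nat) (hd : d < n) :
    (v.take n).getD d 0 = v.getD d 0 := by
  rcases Nat.lt_or_ge d v.length with h | h
  · rw [List.getD_eq_getElem _ _ (by simp; omega), List.getD_eq_getElem _ _ h]
    simp
  · rw [List.getD_eq_default _ _ (by simp; omega), List.getD_eq_default _ _ h]

lemma pvTake_good {n : Nat} {v : List Int} (h : pvOKRow n v) : pvGoodRow n (v.take n) := by
  constructor
  · have := pvOK_len h
    simp
    omega
  · intro x hx
    exact h.1 x (List.take_subset n v hx)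

lemma pvTake_id {n : Nat} {v : List Int} (h : v.length = n) : v.take n = v :=
  List.take_of_length_le (by omega)

lemma pvTake_zero {n : Nat} {v : List Int} (hz : ∀ x ∈ v, x = 0) (hl : n ≤ v.length) :
    v.take n = pvZeroRow n := by
  apply pvRow_ext (n := n) (by simp; omega) (pvZeroRow_good n).1
  intro d hd
  rw [pvTake_getD d hd, pvZero_getD_any hz, pvZeroRow_getD]

lemma pvOK_good_of_bit {n : Nat} {v : List Int} (h : pvOKRow n v) {c : Nat}
    (hb : v.getD c 0 ≠ 0) : pvGoodRow n v := by
  rcases h.2 with h' | h'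
  · exact ⟨h', h.1⟩
  · exact absurd (pvZero_getD_any h'.2 c) hb

lemma pvOK_allzero {n : Nat} {v : List Int} (h : pvOKRow n v)
    (hz : ∀ d, d < n → v.getD d 0 = 0) : ∀ x ∈ v, x = 0 := by
  rcases h.2 with h' | h'
  · intro x hx
    obtain ⟨i, hi, rfl⟩ := List.mem_iff_getElem.1 hx
    have := hz i (by omega)
    rwa [List.getD_eq_getElem _ _ hi] at this
  · exact h'.2


-- ---------- the GF(2) row space ----------
inductive pvSpan (n : Nat) (R : List (List Int)) : List Int → Prop
  | zero : pvSpan n R (pvZeroRow n)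
  | add (v w : List Int) : v ∈ R → pvSpan n R w → pvSpan n R (pvXor v w)

lemma pvSpan_good {n : Nat} {R : List (List Int)} {v : List Int}
    (hR : ∀ r ∈ R, pvGoodRow n r) (h : pvSpan n R v) : pvGoodRow n v := by
  induction h with
  | zero => exact pvZeroRow_good n
  | add v w hv _ ih => exact pvXor_good (hR v hv) ih

lemma pvSpan_mem {n : Nat} {R : List (List Int)} {v : List Int}
    (hR : ∀ r ∈ R, pvGoodRow n r) (hv : v ∈ R) : pvSpan n R v := by
  have h := pvSpan.add v (pvZeroRow n) hv (pvSpan.zero (n := n) (R := R))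
  rwa [pvXor_zeroR (hR v hv)] at h

lemma pvSpan_xor {n : Nat} {R : List (List Int)} {u v : List Int}
    (hR : ∀ r ∈ R, pvGoodRow n r) (h1 : pvSpan n R u) (h2 : pvSpan n R v) :
    pvSpan n R (pvXor u v) := by
  induction h1 with
  | zero => rwa [pvXor_zeroL (pvSpan_good hR h2)]
  | add r w hr hw ih =>
    rw [pvXor_assoc (hR r hr) (pvSpan_good hR hw) (pvSpan_good hR h2)]
    exact pvSpan.add r _ hr ih

lemma pvSpan_mono {n : Nat} {R S : List (List Int)} {v : List Int}
    (hsub : ∀ x ∈ R, x ∈ S) (h : pvSpan n R v) : pvSpan n S v := by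
  induction h with
  | zero => exact pvSpan.zero
  | add r w hr _ ih => exact pvSpan.add r w (hsub r hr) ih

lemma pvSpan_trans {n : Nat} {R S : List (List Int)} {v : List Int}
    (hR : ∀ r ∈ R, pvGoodRow n r) (hmem : ∀ x ∈ S, pvSpan n R x) (h : pvSpan n S v) :
    pvSpan n R v := by
  induction h with
  | zero => exact pvSpan.zero
  | add r w hr _ ih => exact pvSpan_xor hR (hmem r hr) ih

def pvSpanEq (n : Nat) (R S : List (List Int)) : Prop := ∀ v, pvSpan n R v ↔ pvSpan n S v

lemma pvSpanEq_of_members {n : Nat} {R S : List (List Int)}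
    (h1 : ∀ x ∈ R, pvGoodRow n x) (h2 : ∀ y ∈ S, pvGoodRow n y)
    (m1 : ∀ x ∈ R, pvSpan n S x) (m2 : ∀ y ∈ S, pvSpan n R y) : pvSpanEq n R S :=
  fun _ => ⟨fun h => pvSpan_trans h2 m1 h, fun h => pvSpan_trans h1 m2 h⟩

-- ---------- reduced row-echelon pair lists and their uniqueness ----------
def pvRREF (n : Nat) (P : List (Nat × List Int)) : Prop :=
  List.Pairwise (fun a b => a.1 < b.1) P ∧
  ∀ pb ∈ P, pb.1 < n ∧ pvGoodRow n pb.2 ∧ pb.2.getD pb.1 0 = 1 ∧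
    (∀ d, d < pb.1 → pb.2.getD d 0 = 0) ∧ ∀ qb ∈ P, qb.1 ≠ pb.1 → pb.2.getD qb.1 0 = 0

lemma pvRREF_good {n : Nat} {P : List (Nat × List Int)} (h : pvRREF n P) :
    ∀ r ∈ P.map Prod.snd, pvGoodRow n r := by
  intro r hr
  obtain ⟨pb, hpb, rfl⟩ := List.mem_map.1 hr
  exact (h.2 pb hpb).2.1

def pvXorAll (n : Nat) : List (List Int) → List Int
  | [] => pvZeroRow n
  | v :: vs => pvXor v (pvXorAll n vs)

lemma pvXorAll_good {n : Nat} {L : List (List Int)} (h : ∀ v ∈ L, pvGoodRow n v) :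
    pvGoodRow n (pvXorAll n L) := by
  induction L with
  | nil => exact pvZeroRow_good n
  | cons v vs ih =>
    exact pvXor_good (h v (by simp)) (ih (fun x hx => h x (by simp [hx])))

lemma pvXorAll_getD_zero {n : Nat} {L : List (List Int)} (h : ∀ v ∈ L, pvGoodRow n v)
    (d : Nat) (hz : ∀ v ∈ L, v.getD d 0 = 0) : (pvXorAll n L).getD d 0 = 0 := by
  induction L with
  | nil => exact pvZeroRow_getD n d
  | cons v vs ih =>
    show (pvXor v (pvXorAll n vs)).getD d 0 = 0
    rw [pvXor_getD (by
        rw [(h v (by simp)).1, (pvXorAll_good (fun x hx => h x (by simp [hx]))).1]),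
      hz v (by simp), ih (fun x hx => h x (by simp [hx])) (fun x hx => hz x (by simp [hx]))]
    decide

lemma pvToggle {n : Nat} (P : List (Nat × List Int))
    (hP : List.Pairwise (fun a b : Nat × List Int => a.1 < b.1) P)
    (hgood : ∀ pb ∈ P, pvGoodRow n pb.2) (p0 : Nat) (b : List Int) (hmem : (p0, b) ∈ P)
    (f g : Nat × List Int → Bool)
    (hagree : ∀ qb ∈ P, qb.1 ≠ p0 → f qb = g qb)
    (hflip : ∀ qb ∈ P, qb.1 = p0 → f qb = !g qb) :
    pvXorAll n ((P.filter f).map Prod.snd) = pvXor b (pvXorAll n ((P.filter g).map Prod.snd)) := by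
  induction P with
  | nil => simp at hmem
  | cons a t ih =>
    have hpc := List.pairwise_cons.1 hP
    have hgb : pvGoodRow n b := hgood _ hmem
    by_cases ha1 : a.1 = p0
    · have hab : a = (p0, b) := by
        rcases List.mem_cons.1 hmem with h | h
        · exact h.symm
        · exact absurd (hpc.1 _ h) (by simp [ha1])
      have hnt : ∀ qb ∈ t, qb.1 ≠ p0 := by
        intro qb hqb
        have := hpc.1 qb hqb
        omega
      have hft : t.filter f = t.filter g :=
        List.filter_congr (fun qb hqb => hagree qb (by simp [hqb]) (hnt qb hqb))
      have hfa := hflip a (by simp) ha1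
      cases hg : g a with
      | true =>
        have hf : f a = false := by rw [hfa, hg]; rfl
        rw [List.filter_cons_of_neg (by simp [hf]), List.filter_cons_of_pos (by simp [hg]),
          hft, List.map_cons]
        show pvXorAll n _ = pvXor b (pvXor a.2 (pvXorAll n _))
        rw [hab]
        exact (pvXor_cancel hgb (pvXorAll_good (by
          intro v hv
          obtain ⟨qb, hqb, rfl⟩ := List.mem_map.1 hv
          exact hgood qb (by simp [List.mem_of_mem_filter hqb])))).symm
      | false =>
        have hf : f a = true := by rw [hfa, hg]; rfl
        rw [List.filter_cons_of_pos (by simp [hf]), List.filter_cons_of_neg (by simp [hg]),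
          hft, List.map_cons]
        show pvXor a.2 (pvXorAll n _) = pvXor b (pvXorAll n _)
        rw [hab]
    · have hmt : (p0, b) ∈ t := by
        rcases List.mem_cons.1 hmem with h | h
        · exact absurd (by rw [← h]) ha1
        · exact h
      have ihr := ih hpc.2 (fun pb hpb => hgood pb (by simp [hpb])) hmt
        (fun qb hqb => hagree qb (by simp [hqb])) (fun qb hqb => hflip qb (by simp [hqb]))
      have hfg : f a = g a := hagree a (by simp) ha1
      cases hg : g a with
      | true =>
        rw [List.filter_cons_of_pos (by rw [hfg, hg]), List.filter_cons_of_pos (by rw [hg]),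
          List.map_cons, List.map_cons]
        show pvXor a.2 (pvXorAll n _) = pvXor b (pvXor a.2 (pvXorAll n _))
        rw [ihr]
        exact pvXor_left_comm (hgood a (by simp)) hgb (pvXorAll_good (by
          intro v hv
          obtain ⟨qb, hqb, rfl⟩ := List.mem_map.1 hv
          exact hgood qb (by simp [List.mem_of_mem_filter hqb])))
      | false =>
        rw [List.filter_cons_of_neg (by simp [hfg, hg]),
          List.filter_cons_of_neg (by simp [hg])]
        exact ihr

lemma pvSpanRep {n : Nat} {P : List (Nat × List Int)} (h2 : pvRREF n P) (v : List Int)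
    (hv : pvSpan n (P.map Prod.snd) v) :
    v = pvXorAll n ((P.filter (fun qb => decide (v.getD qb.1 0 = 1))).map Prod.snd) := by
  induction hv with
  | zero =>
    rw [List.filter_eq_nil_iff.2 (by
      intro qb _
      simp only [decide_eq_true_eq, pvZeroRow_getD]
      decide)]
    rfl
  | add b w hb hw ih =>
    obtain ⟨pb, hpb, rfl⟩ := List.mem_map.1 hb
    have hprops := h2.2 pb hpb
    have hwg : pvGoodRow n w := pvSpan_good (pvRREF_good h2) hw
    have htog := pvToggle (n := n) P h2.1 (fun qb hqb => (h2.2 qb hqb).2.1) pb.1 pb.2 hpb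
      (fun qb => decide ((pvXor pb.2 w).getD qb.1 0 = 1))
      (fun qb => decide (w.getD qb.1 0 = 1)) ?agree ?flip
    · rw [htog, ← ih]
    case agree =>
      intro qb hqb hne
      have hcross := hprops.2.2.2.2 qb hqb hne
      simp only []
      rw [pvXor_getD (by simp [hprops.2.1.1, hwg.1]), hcross, PySem.Int.bxor_comm,
        PySem.Int.bxor_zero]
    case flip =>
      intro qb hqb he
      simp only []
      rw [he, pvXor_getD (by simp [hprops.2.1.1, hwg.1]), hprops.2.2.1]
      rcases pvGood_getD01 hwg pb.1 with h0 | h0 <;> rw [h0] <;> decide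

lemma pvSpanLead {n : Nat} {P : List (Nat × List Int)} (h2 : pvRREF n P) (v : List Int)
    (hv : pvSpan n (P.map Prod.snd) v) (p : Nat) (hvp : v.getD p 0 = 1)
    (hlow : ∀ d, d < p → v.getD d 0 = 0) : ∃ b, (p, b) ∈ P := by
  have hrep := pvSpanRep h2 v hv
  cases hS : P.filter (fun qb => decide (v.getD qb.1 0 = 1)) with
  | nil =>
    rw [hS] at hrep
    have hz : v.getD p 0 = 0 := by
      rw [hrep]
      simp only [List.map_nil, pvXorAll, pvZeroRow_getD]
    rw [hz] at hvp
    exact absurd hvp (by decide)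
  | cons qb S' =>
    have hqS : qb ∈ P.filter (fun qb => decide (v.getD qb.1 0 = 1)) := by
      rw [hS]; simp
    have hqP : qb ∈ P := List.mem_of_mem_filter hqS
    have hqv : v.getD qb.1 0 = 1 := by
      have := List.of_mem_filter hqS
      simpa using this
    have hnlt : ¬ qb.1 < p := fun h => absurd (hlow qb.1 h ▸ hqv) (by simp)
    have hge : ∀ rb ∈ P.filter (fun qb => decide (v.getD qb.1 0 = 1)), qb.1 ≤ rb.1 := by
      have hsorted := h2.1.filter (fun qb => decide (v.getD qb.1 0 = 1))
      rw [hS] at hsorted ⊢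
      intro rb hrb
      rcases List.mem_cons.1 hrb with rfl | hrb
      · exact le_refl _
      · exact le_of_lt ((List.pairwise_cons.1 hsorted).1 rb hrb)
    have hnlt2 : ¬ p < qb.1 := by
      intro hp
      have hz : v.getD p 0 = 0 := by
        rw [hrep]
        apply pvXorAll_getD_zero
        · intro r hr
          obtain ⟨rb, hrb, rfl⟩ := List.mem_map.1 hr
          exact (h2.2 rb (List.mem_of_mem_filter hrb)).2.1
        · intro r hr
          obtain ⟨rb, hrb, rfl⟩ := List.mem_map.1 hr
          exact (h2.2 rb (List.mem_of_mem_filter hrb)).2.2.2.1 p (by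
            have := hge rb hrb
            omega)
      rw [hz] at hvp
      exact absurd hvp (by decide)
    have : p = qb.1 := by omega
    exact ⟨qb.2, by rw [this]; exact hqP⟩

lemma pvFilter_singleton {P : List (Nat × List Int)}
    (hP : List.Pairwise (fun a b : Nat × List Int => a.1 < b.1) P) (p0 : Nat) (b : List Int)
    (hmem : (p0, b) ∈ P) (f : Nat × List Int → Bool)
    (hiff : ∀ qb ∈ P, f qb = true ↔ qb.1 = p0) : P.filter f = [(p0, b)] := by
  induction P with
  | nil => simp at hmem
  | cons a t ih =>
    have hpc := List.pairwise_cons.1 hP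
    by_cases ha1 : a.1 = p0
    · have hab : a = (p0, b) := by
        rcases List.mem_cons.1 hmem with h | h
        · exact h.symm
        · exact absurd (hpc.1 _ h) (by simp [ha1])
      have hnil : t.filter f = [] := List.filter_eq_nil_iff.2 (by
        intro qb hqb
        have hlt := hpc.1 qb hqb
        intro hf
        have := (hiff qb (by simp [hqb])).1 hf
        omega)
      rw [List.filter_cons_of_pos ((hiff a (by simp)).2 ha1), hnil, hab]
    · have hmt : (p0, b) ∈ t := by
        rcases List.mem_cons.1 hmem with h | h
        · exact absurd (by rw [← h]) ha1
        · exact h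
      rw [List.filter_cons_of_neg (by
        intro hf
        exact ha1 ((hiff a (by simp)).1 hf))]
      exact ih hpc.2 hmt (fun qb hqb => hiff qb (by simp [hqb]))

lemma pvRREF_subset {n : Nat} {P1 P2 : List (Nat × List Int)} (h1 : pvRREF n P1)
    (h2 : pvRREF n P2) (hs : pvSpanEq n (P1.map Prod.snd) (P2.map Prod.snd)) :
    ∀ pb ∈ P1, pb ∈ P2 := by
  intro pb hpb
  obtain ⟨hn, hgood, hpiv, hlow, hcross⟩ := h1.2 pb hpb
  have hv2 : pvSpan n (P2.map Prod.snd) pb.2 :=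
    (hs _).1 (pvSpan_mem (pvRREF_good h1) (List.mem_map.2 ⟨pb, hpb, rfl⟩))
  obtain ⟨b0, hb0⟩ := pvSpanLead h2 _ hv2 pb.1 hpiv hlow
  have hrep := pvSpanRep h2 _ hv2
  have hfilter : P2.filter (fun qb => decide (pb.2.getD qb.1 0 = 1)) = [(pb.1, b0)] := by
    apply pvFilter_singleton h2.1 pb.1 b0 hb0
    intro qb hqb
    simp only [decide_eq_true_eq]
    constructor
    · intro hone
      by_contra hne
      obtain ⟨hn2, hgood2, hpiv2, hlow2, _⟩ := h2.2 qb hqb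
      have hq1 : pvSpan n (P1.map Prod.snd) qb.2 :=
        (hs _).2 (pvSpan_mem (pvRREF_good h2) (List.mem_map.2 ⟨qb, hqb, rfl⟩))
      obtain ⟨b1, hb1⟩ := pvSpanLead h1 _ hq1 qb.1 hpiv2 hlow2
      have := hcross (qb.1, b1) hb1 (by simpa using hne)
      rw [this] at hone
      exact absurd hone (by decide)
    · intro he
      rw [he]
      exact hpiv
  rw [hfilter] at hrep
  have hb0g : pvGoodRow n b0 := (h2.2 _ hb0).2.1
  have : pb.2 = b0 := by
    rw [hrep]
    show pvXor b0 (pvXorAll n []) = b0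
    exact pvXor_zeroR hb0g
  have hpb2 : pb = (pb.1, b0) := by
    cases pb
    simp_all
  rw [hpb2]
  exact hb0
  
lemma pvSorted_ext {P1 P2 : List (Nat × List Int)}
    (h1 : List.Pairwise (fun a b : Nat × List Int => a.1 < b.1) P1)
    (h2 : List.Pairwise (fun a b : Nat × List Int => a.1 < b.1) P2)
    (hm : ∀ x, x ∈ P1 ↔ x ∈ P2) : P1 = P2 := by
  induction P1 generalizing P2 with
  | nil =>
    cases P2 with
    | nil => rfl
    | cons b t2 => exact absurd ((hm b).2 (by simp)) (by simp)
  | cons a t1 ih =>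
    cases P2 with
    | nil => exact absurd ((hm a).1 (by simp)) (by simp)
    | cons b t2 =>
      have hpc1 := List.pairwise_cons.1 h1
      have hpc2 := List.pairwise_cons.1 h2
      have hab : a = b := by
        rcases List.mem_cons.1 ((hm a).1 (by simp)) with h | h
        · exact h
        · rcases List.mem_cons.1 ((hm b).2 (by simp)) with h' | h'
          · exact h'.symm
          · have := hpc1.1 b h'
            have := hpc2.1 a h
            omega
      subst hab
      have : t1 = t2 := by
        apply ih hpc1.2 hpc2.2
        intro x
        constructor
        · intro hx
          rcases List.mem_cons.1 ((hm x).1 (by simp [hx])) with rfl | h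
          · exact absurd (hpc1.1 x hx) (lt_irrefl _)
          · exact h
        · intro hx
          rcases List.mem_cons.1 ((hm x).2 (by simp [hx])) with rfl | h
          · exact absurd (hpc2.1 x hx) (lt_irrefl _)
          · exact h
      rw [this]

theorem pvRREF_unique {n : Nat} {P1 P2 : List (Nat × List Int)} (h1 : pvRREF n P1)
    (h2 : pvRREF n P2) (hs : pvSpanEq n (P1.map Prod.snd) (P2.map Prod.snd)) : P1 = P2 :=
  pvSorted_ext h1.1 h2.1 (fun x =>
    ⟨fun hx => pvRREF_subset h1 h2 hs x hx,
     fun hx => pvRREF_subset h2 h1 (fun v => (hs v).symm) x hx⟩)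


-- ---------- a functional model of A's column sweep ----------
def pvERow (c : Nat) (piv row : List Int) : List Int :=
  if row.getD c 0 ≠ 0 then pvXor row piv else row

def pvFindIdxF (c : Nat) : List (List Int) → Option Nat
  | [] => none
  | row :: rs => if row.getD c 0 ≠ 0 then some 0 else (pvFindIdxF c rs).map (· + 1)

def pvStepF (c : Nat) (s : List (Nat × List Int) × List (List Int)) :
    List (Nat × List Int) × List (List Int) :=
  match pvFindIdxF c s.2 with
  | none => s
  | some j =>
    let piv := s.2.getD j []
    let rest1 := if j = 0 then s.2.tail else (s.2.tail).set (j - 1) (s.2.headD [])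
    (s.1.map (fun pb => (pb.1, pvERow c piv pb.2)) ++ [(c, piv)], rest1.map (pvERow c piv))

def pvLoopF : List Nat → List (Nat × List Int) × List (List Int) →
    List (Nat × List Int) × List (List Int)
  | [], s => s
  | c :: cs, s => pvLoopF cs (pvStepF c s)

lemma pvLoopF_nil_rest (cs : List Nat) (done : List (Nat × List Int)) :
    pvLoopF cs (done, []) = (done, []) := by
  induction cs with
  | nil => rfl
  | cons c cs ih => simpa [pvLoopF, pvStepF, pvFindIdxF] using ih

-- ---------- getD helpers ----------
lemma pvGetD_set_ne (l : List (List Int)) (i j : Nat) (v : List Int) (h : i ≠ j) :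
    (l.set i v).getD j [] = l.getD j [] := by
  simp [List.getD_eq_getElem?_getD, List.getElem?_set_ne h]

lemma pvGetD_set_self (l : List (List Int)) (i : Nat) (v : List Int) (h : i < l.length) :
    (l.set i v).getD i [] = v := by
  simp [List.getD_eq_getElem?_getD, List.getElem?_set_self h]

lemma pvGetD_append (D L : List (List Int)) (q : Nat) :
    (D ++ L).getD q [] = if q < D.length then D.getD q [] else L.getD (q - D.length) [] := by
  by_cases h : q < D.length
  · simp [List.getD_eq_getElem?_getD, List.getElem?_append_left h, h]
  · simp [List.getD_eq_getElem?_getD, List.getElem?_append_right (by omega : D.length ≤ q), h]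

lemma pvExtGetD {l1 l2 : List (List Int)} (h : l1.length = l2.length)
    (hq : ∀ q, q < l1.length → l1.getD q [] = l2.getD q []) : l1 = l2 := by
  apply List.ext_getElem h
  intro i h1 h2
  have := hq i h1
  rwa [List.getD_eq_getElem _ _ h1, List.getD_eq_getElem _ _ h2] at this

-- ---------- characterising A's elimination pass ----------
lemma pvElimA_length (r c : Nat) (idxs : List Nat) (a : List (List Int)) :
    (pvElimA r c idxs a).length = a.length := by
  induction idxs generalizing a with
  | nil => rfl
  | cons i is ih =>
    rw [pvElimA]
    split
    · rw [ih]; exact List.length_set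
    · exact ih a

lemma pvElimA_getD (r c : Nat) (idxs : List Nat) (hnd : idxs.Nodup) (a : List (List Int))
    (q : Nat) :
    (pvElimA r c idxs a).getD q [] =
      if q ∈ idxs ∧ q ≠ r then pvERow c (a.getD r []) (a.getD q []) else a.getD q [] := by
  induction idxs generalizing a with
  | nil => simp [pvElimA]
  | cons i is ih =>
    have hnd' := List.nodup_cons.1 hnd
    rw [pvElimA]
    by_cases hc : i ≠ r ∧ (a.getD i []).getD c 0 ≠ 0
    · rw [if_pos hc]
      have hi : i < a.length := by
        by_contra hge
        have hnil : a.getD i [] = [] := by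
          rw [List.getD_eq_default]
          omega
        rw [hnil] at hc
        exact hc.2 (by simp)
      set w := List.zipWith (fun u v => PySem.Int.bxor u v) (a.getD i []) (a.getD r []) with hw
      have hwx : w = pvXor (a.getD i []) (a.getD r []) := rfl
      have hr' : (a.set i w).getD r [] = a.getD r [] := pvGetD_set_ne a i r w hc.1
      rw [ih hnd'.2 (a.set i w), hr']
      by_cases hq : q = i
      · subst hq
        rw [if_neg (fun hmem => hnd'.1 hmem.1), if_pos ⟨by simp, hc.1⟩,
          pvGetD_set_self a q w hi, pvERow, if_pos hc.2, hwx]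
      · have hiq : i ≠ q := fun h => hq h.symm
        rw [pvGetD_set_ne a i q w hiq]
        have hmem : (q ∈ i :: is ∧ q ≠ r) ↔ (q ∈ is ∧ q ≠ r) := by
          simp [List.mem_cons, hq]
        rw [if_congr hmem rfl rfl]
    · rw [if_neg hc, ih hnd'.2 a]
      by_cases hq : q = i
      · subst hq
        rw [if_neg (fun hmem => hnd'.1 hmem.1)]
        by_cases hqr : q = r
        · rw [if_neg (fun h => h.2 hqr)]
        · rw [if_pos ⟨by simp, hqr⟩, pvERow, if_neg (fun hbit => hc ⟨hqr, hbit⟩)]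
      · have hmem : (q ∈ i :: is ∧ q ≠ r) ↔ (q ∈ is ∧ q ≠ r) := by
          simp [List.mem_cons, hq]
        rw [if_congr hmem rfl rfl]


lemma pvElimA_shape (c : Nat) (D : List (List Int)) (piv : List Int) (R : List (List Int)) :
    pvElimA D.length c (List.range (D.length + (R.length + 1))) (D ++ piv :: R)
      = D.map (pvERow c piv) ++ piv :: R.map (pvERow c piv) := by
  have hlenA : (D ++ piv :: R).length = D.length + (R.length + 1) := by simp
  have hpiv : (D ++ piv :: R).getD D.length [] = piv := by
    rw [pvGetD_append]
    simp
  apply pvExtGetD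
  · rw [pvElimA_length, hlenA]
    simp
  · intro q hq
    rw [pvElimA_length, hlenA] at hq
    rw [pvElimA_getD _ _ _ List.nodup_range _ _, hpiv]
    rcases Nat.lt_trichotomy q D.length with h | h | h
    · rw [if_pos ⟨by simp [List.mem_range]; omega, by omega⟩, pvGetD_append, if_pos h,
        pvGetD_append, if_pos (by simp; omega)]
      rw [List.getD_eq_getElem _ _ h,
        List.getD_eq_getElem _ _ (show q < (D.map (pvERow c piv)).length by simpa using h)]
      simp
    · subst h
      rw [if_neg (fun hh => hh.2 rfl), hpiv, pvGetD_append, if_neg (by simp)]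
      simp
    · rw [if_pos ⟨by simp [List.mem_range]; omega, by omega⟩, pvGetD_append,
        if_neg (by omega), pvGetD_append, if_neg (by simp; omega)]
      have h1 : q - D.length = (q - D.length - 1) + 1 := by omega
      have h2 : q - (D.map (pvERow c piv)).length = (q - D.length - 1) + 1 := by simp; omega
      rw [h1, h2]
      rw [List.getD_cons_succ, List.getD_cons_succ]
      have h3 : q - D.length - 1 < R.length := by omega
      rw [List.getD_eq_getElem _ _ h3, List.getD_eq_getElem _ _ (by simpa using h3)]
      simp

lemma pvFindIdxF_none (c : Nat) (rest : List (List Int)) (h : pvFindIdxF c rest = none) :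
    ∀ row ∈ rest, row.getD c 0 = 0 := by
  induction rest with
  | nil => simp
  | cons x xs ih =>
    rw [pvFindIdxF] at h
    split at h
    · exact absurd h (by simp)
    · intro row hrow
      rcases List.mem_cons.1 hrow with rfl | hrow
      · by_contra hbit
        simp_all
      · exact ih (by simpa using h) row hrow


lemma pvFindIdxF_some (c : Nat) (rest : List (List Int)) (j : Nat)
    (h : pvFindIdxF c rest = some j) :
    j < rest.length ∧ (rest.getD j []).getD c 0 ≠ 0 := by
  induction rest generalizing j with
  | nil => simp [pvFindIdxF] at h
  | cons x xs ih =>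
    rw [pvFindIdxF] at h
    split at h
    · have : j = 0 := by simpa using h.symm
      subst this
      constructor
      · simp
      · simpa using ‹x.getD c 0 ≠ 0›
    · obtain ⟨j', hj', rfl⟩ := Option.map_eq_some_iff.1 h
      obtain ⟨h1, h2⟩ := ih j' hj'
      exact ⟨by simp; omega, by simpa using h2⟩

lemma pvFindPivotA_eq (c : Nat) (D rest : List (List Int)) :
    pvFindPivotA (D ++ rest) c (List.range' D.length rest.length)
      = (pvFindIdxF c rest).map (· + D.length) := by
  induction rest generalizing D with
  | nil => simp [pvFindPivotA, pvFindIdxF]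
  | cons x xs ih =>
    have hx : (D ++ x :: xs).getD D.length [] = x := by
      rw [pvGetD_append]
      simp
    show pvFindPivotA (D ++ x :: xs) c (List.range' D.length (xs.length + 1)) = _
    rw [List.range'_succ, pvFindPivotA, hx, pvFindIdxF]
    by_cases hbit : x.getD c 0 ≠ 0
    · rw [if_pos hbit, if_pos hbit]
      simp
    · rw [if_neg hbit, if_neg hbit]
      have hD : D ++ x :: xs = (D ++ [x]) ++ xs := by simp
      have hlen : D.length + 1 = (D ++ [x]).length := by simp
      rw [hD, hlen, ih (D ++ [x])]
      cases pvFindIdxF c xs with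
      | none => simp
      | some v =>
        simp
        omega

lemma pvFindPivotA_eq' (c : Nat) (D rest : List (List Int)) (r : Nat) (hr : r = D.length) :
    pvFindPivotA (D ++ rest) c (List.range' r rest.length)
      = (pvFindIdxF c rest).map (· + r) := by
  subst hr
  exact pvFindPivotA_eq c D rest

lemma pvLoopA_sim (cs : List Nat) (done : List (Nat × List Int)) (rest : List (List Int)) :
    pvLoopA (done.length + rest.length) cs (done.map Prod.snd ++ rest) done.length
        (done.map (fun pb => ((pb.1 : Nat) : Int)))
      = ((pvLoopF cs (done, rest)).1.map Prod.snd ++ (pvLoopF cs (done, rest)).2,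
         (pvLoopF cs (done, rest)).1.length,
         (pvLoopF cs (done, rest)).1.map (fun pb => ((pb.1 : Nat) : Int))) := by
  induction cs generalizing done rest with
  | nil => simp [pvLoopA, pvLoopF]
  | cons c cs ih =>
    rw [pvLoopA, pvLoopF]
    have hsub : done.length + rest.length - done.length = rest.length := by omega
    rw [hsub, pvFindPivotA_eq' c (done.map Prod.snd) rest done.length (by simp)]
    cases hfind : pvFindIdxF c rest with
    | none =>
      simp only [Option.map_none]
      rw [pvStepF]
      simp only [hfind]
      exact ih done rest
    | some j =>
      obtain ⟨hj, hbit⟩ := pvFindIdxF_some c rest j hfind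
      cases rest with
      | nil => simp at hj
      | cons x0 xs =>
        simp only [Option.map_some]
        set D := done.map Prod.snd with hD
        have hDlen : D.length = done.length := by rw [hD, List.length_map]
        set piv := (x0 :: xs).getD j [] with hpivdef
        set rest1 : List (List Int) :=
          if j = 0 then xs else xs.set (j - 1) x0 with hrest1
        set f := pvERow c piv with hf
        have hstep : pvStepF c (done, x0 :: xs)
            = (done.map (fun pb => (pb.1, f pb.2)) ++ [(c, piv)], rest1.map f) := by
          rw [pvStepF]
          simp only [hfind]
          rfl
        have hlen1 : rest1.length = xs.length := by
          rw [hrest1]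
          split <;> simp
        have hr : (D ++ x0 :: xs).getD done.length [] = x0 := by
          rw [pvGetD_append, if_neg (by omega)]
          have e : done.length - D.length = 0 := by omega
          rw [e]
          rfl
        have hp : (D ++ x0 :: xs).getD (j + done.length) [] = piv := by
          rw [pvGetD_append, if_neg (by omega)]
          have e : j + done.length - D.length = j := by omega
          rw [e]
        have hswap : ((D ++ x0 :: xs).set done.length piv).set (j + done.length) x0
            = D ++ piv :: rest1 := by
          rw [List.set_append, if_neg (by omega), List.set_append, if_neg (by omega)]
          have e1 : done.length - D.length = 0 := by omega
          have e2 : j + done.length - D.length = j := by omega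
          rw [e1, e2, List.set_cons_zero]
          by_cases hj0 : j = 0
          · subst hj0
            rw [List.set_cons_zero, hrest1]
            simp [hpivdef]
          · have e3 : j = (j - 1) + 1 := by omega
            rw [e3, List.set_cons_succ, hrest1, if_neg hj0]
        have hshape : pvElimA done.length c
              (List.range (done.length + (x0 :: xs).length)) (D ++ piv :: rest1)
            = D.map f ++ piv :: rest1.map f := by
          have e2 : done.length + (x0 :: xs).length = D.length + (rest1.length + 1) := by
            rw [hlen1, hDlen]
            simp
          rw [e2, show done.length = D.length from hDlen.symm, hf]
          exact pvElimA_shape c D piv rest1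
        rw [hr, hp, hswap, hshape, hstep]
        set done' := done.map (fun pb => (pb.1, f pb.2)) ++ [(c, piv)] with hdone'
        have hD' : done'.map Prod.snd = D.map f ++ [piv] := by
          rw [hdone', hD]
          simp
        have hlen' : done'.length = done.length + 1 := by rw [hdone']; simp
        have hcast : done'.map (fun pb => ((pb.1 : Nat) : Int))
            = done.map (fun pb => ((pb.1 : Nat) : Int)) ++ [(c : Int)] := by
          rw [hdone']
          simp
        by_cases hbreak : done.length + 1 = done.length + (x0 :: xs).length
        · have hxs : rest1 = [] := by
            apply List.eq_nil_of_length_eq_zero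
            have h1 : (x0 :: xs).length = 1 := by omega
            have h2 : xs.length + 1 = 1 := by simpa using h1
            rw [hlen1]
            omega
          rw [if_pos hbreak, hxs]
          simp only [List.map_nil, pvLoopF_nil_rest]
          rw [hD', hlen', hcast]
          simp
        · rw [if_neg hbreak]
          have hmid := ih done' (rest1.map f)
          rw [hD', hlen', hcast, List.append_assoc, List.singleton_append] at hmid
          have harith : done.length + 1 + (rest1.map f).length
              = done.length + (x0 :: xs).length := by
            rw [List.length_map, hlen1]
            have hxlen : (x0 :: xs).length = xs.length + 1 := by simp
            omega
          rw [harith] at hmid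
          exact hmid


-- ---------- the invariant of A's functional model ----------
lemma pvXor_cancel_right {n : Nat} {u v : List Int} (hu : pvGoodRow n u) (hv : pvGoodRow n v) :
    pvXor (pvXor u v) v = u := by
  rw [pvXor_assoc hu hv hv, pvXor_self hv, pvXor_zeroR hu]

lemma pvERow_good {n c : Nat} {piv row : List Int} (hpiv : pvGoodRow n piv)
    (hrow : pvGoodRow n row) : pvGoodRow n (pvERow c piv row) := by
  unfold pvERow
  split
  · exact pvXor_good hrow hpiv
  · exact hrow

lemma pvERow_getD {n c : Nat} {piv row : List Int} (hpiv : pvGoodRow n piv)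
    (hrow : pvGoodRow n row) (d : Nat) :
    (pvERow c piv row).getD d 0 =
      if row.getD c 0 ≠ 0 then PySem.Int.bxor (row.getD d 0) (piv.getD d 0)
      else row.getD d 0 := by
  by_cases hb : row.getD c 0 ≠ 0
  · rw [pvERow, if_pos hb, if_pos hb]
    exact pvXor_getD (by rw [hrow.1, hpiv.1]) d
  · rw [pvERow, if_neg hb, if_neg hb]

lemma pvERow_take {n c : Nat} {piv row : List Int} (hc : c < n) (hpiv : pvGoodRow n piv)
    (hrow : pvOKRow n row) : (pvERow c piv row).take n = pvERow c piv (row.take n) := by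
  by_cases hb : row.getD c 0 ≠ 0
  · have hrg : pvGoodRow n row := pvOK_good_of_bit hrow hb
    have h1 : row.take n = row := pvTake_id hrg.1
    have h2 : (pvERow c piv row).take n = pvERow c piv row :=
      pvTake_id (pvERow_good hpiv hrg).1
    rw [h1, h2]
  · have h1 : pvERow c piv row = row := by rw [pvERow, if_neg hb]
    have h2 : pvERow c piv (row.take n) = row.take n := by
      rw [pvERow, if_neg (by rw [pvTake_getD c hc]; exact hb)]
    rw [h1, h2]

lemma pvERow_OK {n c : Nat} {piv row : List Int} (hpiv : pvGoodRow n piv)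
    (hrow : pvOKRow n row) : pvOKRow n (pvERow c piv row) := by
  by_cases hb : row.getD c 0 ≠ 0
  · have hrg : pvGoodRow n row := pvOK_good_of_bit hrow hb
    have := pvERow_good (c := c) hpiv hrg
    exact ⟨this.2, Or.inl this.1⟩
  · rw [pvERow, if_neg hb]
    exact hrow

lemma pvMem_set_or (l : List (List Int)) (k : Nat) (x y : List Int) (hy : y ∈ l) :
    y ∈ l.set k x ∨ y = l.getD k [] := by
  obtain ⟨i, hi, rfl⟩ := List.mem_iff_getElem.1 hy
  by_cases hik : i = k
  · right
    subst hik
    rw [List.getD_eq_getElem _ _ hi]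
  · left
    exact List.mem_iff_getElem.2 ⟨i, by simpa using hi, by rw [List.getElem_set_ne (fun h => hik h.symm)]⟩

lemma pvRest1_sub (rest : List (List Int)) (j : Nat) :
    ∀ row ∈ (if j = 0 then rest.tail else rest.tail.set (j - 1) (rest.headD [])), row ∈ rest := by
  intro row hrow
  cases rest with
  | nil => simp at hrow
  | cons x0 xs =>
    by_cases hj0 : j = 0
    · rw [if_pos hj0] at hrow
      exact List.mem_cons_of_mem _ hrow
    · rw [if_neg hj0] at hrow
      rcases List.mem_or_eq_of_mem_set hrow with h | h
      · exact List.mem_cons_of_mem _ h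
      · rw [h]
        simp
  
lemma pvRest_cover (rest : List (List Int)) (j : Nat) (hj : j < rest.length) :
    ∀ y ∈ rest, y = rest.getD j [] ∨
      y ∈ (if j = 0 then rest.tail else rest.tail.set (j - 1) (rest.headD [])) := by
  intro y hy
  cases rest with
  | nil => simp at hy
  | cons x0 xs =>
    by_cases hj0 : j = 0
    · subst hj0
      rw [if_pos rfl]
      rcases List.mem_cons.1 hy with rfl | h
      · left; rfl
      · right; exact h
    · rw [if_neg hj0]
      obtain ⟨j', rfl⟩ : ∃ j', j = j' + 1 := ⟨j - 1, by omega⟩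
      have hj1 : j' < xs.length := by simp at hj; omega
      simp only [Nat.add_sub_cancel]
      rcases List.mem_cons.1 hy with rfl | h
      · right
        show y ∈ xs.set j' y
        exact List.mem_iff_getElem.2 ⟨j', by simpa using hj1, List.getElem_set_self ..⟩
      · rcases pvMem_set_or xs j' x0 y h with h' | h'
        · right; exact h'
        · left
          rw [h', List.getD_cons_succ]

def pvInvA (n c : Nat) (M : List (List Int)) (s : List (Nat × List Int) × List (List Int)) : Prop :=
  pvRREF n s.1 ∧ (∀ pb ∈ s.1, pb.1 < c) ∧
  (∀ row ∈ s.2, pvOKRow n row ∧ ∀ d, d < c → row.getD d 0 = 0) ∧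
  pvSpanEq n (s.1.map Prod.snd ++ s.2.map (List.take n)) M

lemma pvStepF_inv (n c : Nat) (M : List (List Int)) (s : List (Nat × List Int) × List (List Int))
    (hc : c < n) (h : pvInvA n c M s) : pvInvA n (c + 1) M (pvStepF c s) := by
  obtain ⟨hR, hlt, hrest, hspan⟩ := h
  rw [pvStepF]
  cases hfind : pvFindIdxF c s.2 with
  | none =>
    refine ⟨hR, fun pb hpb => by have := hlt pb hpb; omega, ?_, hspan⟩
    intro row hrow
    refine ⟨(hrest row hrow).1, ?_⟩
    intro d hd
    rcases Nat.lt_or_ge d c with h' | h'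
    · exact (hrest row hrow).2 d h'
    · have hdc : d = c := by omega
      rw [hdc]
      exact pvFindIdxF_none c s.2 hfind row hrow
  | some j =>
    obtain ⟨hj, hbit⟩ := pvFindIdxF_some c s.2 j hfind
    set piv := s.2.getD j [] with hpivdef
    have hpivmem : piv ∈ s.2 := by
      rw [hpivdef, List.getD_eq_getElem _ _ hj]
      exact List.getElem_mem hj
    obtain ⟨hpivok, hpivz⟩ := hrest piv hpivmem
    have hpivg : pvGoodRow n piv := pvOK_good_of_bit hpivok hbit
    have hbit1 : piv.getD c 0 = 1 := (pvGood_getD01 hpivg c).resolve_left hbit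
    set rest1 := if j = 0 then s.2.tail else s.2.tail.set (j - 1) (s.2.headD []) with hrest1
    have hsub1 : ∀ row ∈ rest1, row ∈ s.2 := pvRest1_sub s.2 j
    -- properties of updated done rows
    have hdone : ∀ pb ∈ s.1, pvGoodRow n pb.2 ∧ pb.1 < c := by
      intro pb hpb
      exact ⟨(hR.2 pb hpb).2.1, hlt pb hpb⟩
    -- the new done list
    set done' := s.1.map (fun pb => (pb.1, pvERow c piv pb.2)) ++ [(c, piv)] with hdone'
    have hmem' : ∀ pb ∈ done', (∃ qb ∈ s.1, pb = (qb.1, pvERow c piv qb.2)) ∨ pb = (c, piv) := by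
      intro pb hpb
      rw [hdone'] at hpb
      rcases List.mem_append.1 hpb with h' | h'
      · obtain ⟨qb, hqb, rfl⟩ := List.mem_map.1 h'
        exact Or.inl ⟨qb, hqb, rfl⟩
      · right
        simpa using h'
    have hfst' : ∀ pb ∈ done', pb.1 ≤ c := by
      intro pb hpb
      rcases hmem' pb hpb with ⟨qb, hqb, rfl⟩ | rfl
      · exact le_of_lt (hlt qb hqb)
      · exact le_refl c
    -- entries of updated done rows at a column d
    have hgetD' : ∀ qb ∈ s.1, ∀ d : Nat,
        (pvERow c piv qb.2).getD d 0 =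
          if qb.2.getD c 0 ≠ 0 then PySem.Int.bxor (qb.2.getD d 0) (piv.getD d 0)
          else qb.2.getD d 0 := by
      intro qb hqb d
      exact pvERow_getD hpivg (hdone qb hqb).1 d
    have hRREF' : pvRREF n done' := by
      constructor
      · rw [hdone']
        rw [List.pairwise_append]
        refine ⟨?_, by simp, ?_⟩
        · rw [List.pairwise_map]
          exact hR.1
        · intro x hx y hy
          obtain ⟨qb, hqb, rfl⟩ := List.mem_map.1 hx
          have := hlt qb hqb
          simp at hy
          rw [hy]
          simpa using this
      · intro pb hpb
        rcases hmem' pb hpb with ⟨qb, hqb, rfl⟩ | rfl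
        · obtain ⟨hqn, hqg, hqpiv, hqlow, hqcross⟩ := hR.2 qb hqb
          have hqc := hlt qb hqb
          refine ⟨hqn, pvERow_good hpivg hqg, ?_, ?_, ?_⟩
          · rw [hgetD' qb hqb qb.1, hpivz qb.1 hqc, hqpiv]
            split <;> decide
          · intro d hd
            rw [hgetD' qb hqb d, hqlow d hd, hpivz d (by omega)]
            split <;> decide
          · intro rb hrb hne
            rcases hmem' rb hrb with ⟨sb, hsb, rfl⟩ | rfl
            · have hsc := hlt sb hsb
              rw [hgetD' qb hqb sb.1,
                hR.2 qb hqb |>.2.2.2.2 sb hsb (by simpa using hne), hpivz sb.1 hsc]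
              split <;> decide
            · show (pvERow c piv qb.2).getD c 0 = 0
              rw [hgetD' qb hqb c, hbit1]
              rcases pvGood_getD01 hqg c with h0 | h0 <;> rw [h0] <;> simp
        · refine ⟨hc, hpivg, hbit1, hpivz, ?_⟩
          intro rb hrb hne
          rcases hmem' rb hrb with ⟨sb, hsb, rfl⟩ | rfl
          · exact hpivz sb.1 (hlt sb hsb)
          · exact absurd rfl hne
    -- rows of the new rest
    have hrest' : ∀ row ∈ rest1.map (pvERow c piv),
        pvOKRow n row ∧ ∀ d, d < c + 1 → row.getD d 0 = 0 := by
      intro row hrow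
      obtain ⟨r0, hr0, rfl⟩ := List.mem_map.1 hrow
      obtain ⟨hr0ok, hr0z⟩ := hrest r0 (hsub1 r0 hr0)
      refine ⟨pvERow_OK hpivg hr0ok, ?_⟩
      by_cases hzr : r0.getD c 0 ≠ 0
      · have hr0g : pvGoodRow n r0 := pvOK_good_of_bit hr0ok hzr
        intro d hd
        rw [pvERow_getD hpivg hr0g d]
        rcases Nat.lt_or_ge d c with h' | h'
        · rw [hr0z d h', hpivz d h']
          split <;> decide
        · have hdc : d = c := by omega
          rw [hdc, hbit1]
          rcases pvGood_getD01 hr0g c with h0 | h0 <;> rw [h0]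
          · rw [if_neg (by simp)]
          · rw [if_pos (by simp)]
            decide
      · have heq : pvERow c piv r0 = r0 := by rw [pvERow, if_neg hzr]
        rw [heq]
        intro d hd
        rcases Nat.lt_or_ge d c with h' | h'
        · exact hr0z d h'
        · have hdc : d = c := by omega
          rw [hdc]
          exact not_ne_iff.1 hzr
    -- the width-n truncations of the remaining rows: these carry the span
    set restT := s.2.map (List.take n) with hrestT
    have hjT : j < restT.length := by rw [hrestT, List.length_map]; exact hj
    have hgetT : restT.getD j [] = piv := by
      rw [hrestT, List.getD_eq_getElem _ _ (by rw [List.length_map]; exact hj),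
        List.getElem_map]
      have he : s.2[j] = piv := by rw [hpivdef, List.getD_eq_getElem _ _ hj]
      rw [he, pvTake_id hpivg.1]
    have hpivmemT : piv ∈ restT := by
      rw [← hgetT, List.getD_eq_getElem _ _ hjT]
      exact List.getElem_mem hjT
    set rest1T := if j = 0 then restT.tail else restT.tail.set (j - 1) (restT.headD [])
      with hrest1T
    have hsub1T : ∀ row ∈ rest1T, row ∈ restT := by
      rw [hrest1T]
      exact pvRest1_sub restT j
    have hrestTfacts : ∀ row ∈ restT, pvGoodRow n row ∧ ∀ d, d < c → row.getD d 0 = 0 := by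
      intro row hrow
      rw [hrestT] at hrow
      obtain ⟨r0, hr0, rfl⟩ := List.mem_map.1 hrow
      obtain ⟨hok, hz⟩ := hrest r0 hr0
      refine ⟨pvTake_good hok, ?_⟩
      intro d hd
      rw [pvTake_getD d (by omega)]
      exact hz d hd
    have hr1T : rest1T = rest1.map (List.take n) := by
      rw [hrest1T, hrest1, hrestT]
      cases hs2 : s.2 with
      | nil =>
        rw [hs2] at hj
        simp at hj
      | cons x0 xs =>
        by_cases hj0 : j = 0
        · simp [hj0]
        · simp only [if_neg hj0, List.map_cons, List.tail_cons, List.headD_cons]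
          rw [List.map_set]
    have htakecomm : (rest1.map (pvERow c piv)).map (List.take n)
        = rest1T.map (pvERow c piv) := by
      rw [hr1T, List.map_map, List.map_map]
      apply List.map_congr_left
      intro r hr
      show (pvERow c piv r).take n = pvERow c piv (r.take n)
      exact pvERow_take hc hpivg (hrest r (hsub1 r hr)).1
    -- span equality of the new combined list with the old one
    have hgoodOld : ∀ x ∈ s.1.map Prod.snd ++ restT, pvGoodRow n x := by
      intro x hx
      rcases List.mem_append.1 hx with h' | h'
      · exact pvRREF_good hR x h'
      · exact (hrestTfacts x h').1
    have hgoodNew : ∀ x ∈ done'.map Prod.snd ++ rest1T.map (pvERow c piv), pvGoodRow n x := by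
      intro x hx
      rcases List.mem_append.1 hx with h' | h'
      · exact pvRREF_good hRREF' x h'
      · obtain ⟨r0, hr0, rfl⟩ := List.mem_map.1 h'
        exact pvERow_good hpivg (hrestTfacts r0 (hsub1T r0 hr0)).1
    have hpivOld : pvSpan n (s.1.map Prod.snd ++ restT) piv :=
      pvSpan_mem hgoodOld (List.mem_append_right _ hpivmemT)
    have hpivNew : pvSpan n (done'.map Prod.snd ++ rest1T.map (pvERow c piv)) piv := by
      apply pvSpan_mem hgoodNew
      apply List.mem_append_left
      rw [hdone']
      simp
    have hspanNew : pvSpanEq n (done'.map Prod.snd ++ rest1T.map (pvERow c piv))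
        (s.1.map Prod.snd ++ restT) := by
      apply pvSpanEq_of_members hgoodNew hgoodOld
      · -- every new row lies in the span of the old rows
        intro x hx
        rcases List.mem_append.1 hx with h' | h'
        · obtain ⟨pb, hpb, rfl⟩ := List.mem_map.1 h'
          rcases hmem' pb hpb with ⟨qb, hqb, rfl⟩ | rfl
          · have hqmem : pvSpan n (s.1.map Prod.snd ++ restT) qb.2 :=
              pvSpan_mem hgoodOld (List.mem_append_left _ (List.mem_map.2 ⟨qb, hqb, rfl⟩))
            show pvSpan n _ (pvERow c piv qb.2)
            unfold pvERow
            split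
            · exact pvSpan_xor hgoodOld hqmem hpivOld
            · exact hqmem
          · exact hpivOld
        · obtain ⟨r0, hr0, rfl⟩ := List.mem_map.1 h'
          have hrmem : pvSpan n (s.1.map Prod.snd ++ restT) r0 :=
            pvSpan_mem hgoodOld (List.mem_append_right _ (hsub1T r0 hr0))
          unfold pvERow
          split
          · exact pvSpan_xor hgoodOld hrmem hpivOld
          · exact hrmem
      · -- every old row lies in the span of the new rows
        intro y hy
        rcases List.mem_append.1 hy with h' | h'
        · obtain ⟨qb, hqb, rfl⟩ := List.mem_map.1 h'
          have hq := (hdone qb hqb).1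
          have hxmem : pvERow c piv qb.2 ∈ done'.map Prod.snd ++ rest1T.map (pvERow c piv) := by
            apply List.mem_append_left
            rw [hdone']
            refine List.mem_map.2 ⟨(qb.1, pvERow c piv qb.2), ?_, rfl⟩
            exact List.mem_append_left _ (List.mem_map.2 ⟨qb, hqb, rfl⟩)
          have hxspan := pvSpan_mem hgoodNew hxmem
          show pvSpan n _ qb.2
          by_cases hb : qb.2.getD c 0 ≠ 0
          · have : pvERow c piv qb.2 = pvXor qb.2 piv := by rw [pvERow, if_pos hb]
            rw [this] at hxspan
            have := pvSpan_xor hgoodNew hxspan hpivNew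
            rwa [pvXor_cancel_right hq hpivg] at this
          · have : pvERow c piv qb.2 = qb.2 := by rw [pvERow, if_neg hb]
            rwa [this] at hxspan
        · rcases pvRest_cover restT j hjT y h' with h'' | h''
          · rw [h'', hgetT]
            exact hpivNew
          · have hymem : y ∈ rest1T := by rw [hrest1T]; exact h''
            have hyg := (hrestTfacts y (hsub1T y hymem)).1
            have hxmem : pvERow c piv y ∈ done'.map Prod.snd ++ rest1T.map (pvERow c piv) :=
              List.mem_append_right _ (List.mem_map.2 ⟨y, hymem, rfl⟩)
            have hxspan := pvSpan_mem hgoodNew hxmem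
            by_cases hb : y.getD c 0 ≠ 0
            · have : pvERow c piv y = pvXor y piv := by rw [pvERow, if_pos hb]
              rw [this] at hxspan
              have := pvSpan_xor hgoodNew hxspan hpivNew
              rwa [pvXor_cancel_right hyg hpivg] at this
            · have : pvERow c piv y = y := by rw [pvERow, if_neg hb]
              rwa [this] at hxspan
    exact ⟨hRREF', fun pb hpb => by have := hfst' pb hpb; omega, hrest',
      fun v => Iff.trans (by rw [htakecomm]; exact hspanNew v) (hspan v)⟩

lemma pvLoopF_inv (n : Nat) (M : List (List Int)) :
    ∀ (k c : Nat), c + k = n →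
    ∀ s, pvInvA n c M s → pvInvA n n M (pvLoopF (List.range' c k) s) := by
  intro k
  induction k with
  | zero =>
    intro c hc s hs
    have : c = n := by omega
    subst this
    exact hs
  | succ k ih =>
    intro c hc s hs
    rw [List.range'_succ]
    exact ih (c + 1) (by omega) _ (pvStepF_inv n c M s (by omega) hs)


-- ---------- the invariant of B's incremental basis ----------
lemma pvReduceB_go {n : Nat} (B0 : List (Nat × List Int)) (hB : pvRREF n B0) :
    ∀ (suffix pre : List (Nat × List Int)), B0 = pre ++ suffix →
    ∀ cur : List Int, pvGoodRow n cur → (∀ pb ∈ pre, cur.getD pb.1 0 = 0) →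
    ∃ s, pvSpan n (B0.map Prod.snd) s ∧
      List.foldl (fun cur pb => if cur.getD pb.1 0 ≠ 0 then pvXor cur pb.2 else cur) cur suffix
        = pvXor cur s ∧
      pvGoodRow n (List.foldl
        (fun cur pb => if cur.getD pb.1 0 ≠ 0 then pvXor cur pb.2 else cur) cur suffix) ∧
      ∀ pb ∈ B0, (List.foldl
        (fun cur pb => if cur.getD pb.1 0 ≠ 0 then pvXor cur pb.2 else cur) cur suffix).getD
          pb.1 0 = 0 := by
  intro suffix
  induction suffix with
  | nil =>
    intro pre hpre cur hg hz
    refine ⟨pvZeroRow n, pvSpan.zero, (pvXor_zeroR hg).symm, hg, ?_⟩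
    intro pb hpb
    apply hz
    rw [hpre] at hpb
    simpa using hpb
  | cons pb0 t ih =>
    intro pre hpre cur hg hz
    have hmem0 : pb0 ∈ B0 := by rw [hpre]; simp
    have h0 := hB.2 pb0 hmem0
    have hsplit : ∀ x ∈ pre, x.1 < pb0.1 := by
      have hp := hB.1
      rw [hpre, List.pairwise_append] at hp
      intro x hx
      exact hp.2.2 x hx pb0 (by simp)
    simp only [List.foldl_cons]
    by_cases hb : cur.getD pb0.1 0 ≠ 0
    · rw [if_pos hb]
      have hb1 : cur.getD pb0.1 0 = 1 := (pvGood_getD01 hg pb0.1).resolve_left (by simpa using hb)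
      have hg' : pvGoodRow n (pvXor cur pb0.2) := pvXor_good hg h0.2.1
      have hz' : ∀ pb ∈ pre ++ [pb0], (pvXor cur pb0.2).getD pb.1 0 = 0 := by
        intro pb hpb
        rw [pvXor_getD (by rw [hg.1, h0.2.1.1])]
        rcases List.mem_append.1 hpb with h' | h'
        · have hne : pb.1 ≠ pb0.1 := by have := hsplit pb h'; omega
          have hmemB : pb ∈ B0 := by rw [hpre]; exact List.mem_append_left _ h'
          rw [hz pb h', h0.2.2.2.2 pb hmemB hne]
          decide
        · have : pb = pb0 := by simpa using h'
          subst this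
          rw [hb1, h0.2.2.1]
          decide
      obtain ⟨s, hs, heq, hgf, hzf⟩ :=
        ih (pre ++ [pb0]) (by rw [hpre]; simp) (pvXor cur pb0.2) hg' hz'
      have hspb0 : pvSpan n (B0.map Prod.snd) pb0.2 :=
        pvSpan_mem (pvRREF_good hB) (List.mem_map.2 ⟨pb0, hmem0, rfl⟩)
      refine ⟨pvXor pb0.2 s, pvSpan_xor (pvRREF_good hB) hspb0 hs, ?_, hgf, hzf⟩
      rw [heq, pvXor_assoc hg h0.2.1 (pvSpan_good (pvRREF_good hB) hs)]
    · rw [if_neg hb]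
      have hcz : cur.getD pb0.1 0 = 0 := not_ne_iff.1 hb
      refine ih (pre ++ [pb0]) (by rw [hpre]; simp) cur hg ?_
      intro pb hpb
      rcases List.mem_append.1 hpb with h' | h'
      · exact hz pb h'
      · have : pb = pb0 := by simpa using h'
        subst this
        exact hcz

lemma pvLeadB_none {cur : List Int} : ∀ {k : Nat}, pvLeadB cur k = none → ∀ x ∈ cur, x = 0 := by
  induction cur with
  | nil => simp
  | cons x xs ih =>
    intro k hk y hy
    rw [pvLeadB] at hk
    split at hk
    · exact absurd hk (by simp)
    · rcases List.mem_cons.1 hy with rfl | hy'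
      · simpa using ‹¬ y ≠ 0›
      · exact ih hk y hy'

lemma pvLeadB_some {cur : List Int} {k j : Nat} (h : pvLeadB cur k = some j) :
    k ≤ j ∧ j - k < cur.length ∧ cur.getD (j - k) 0 ≠ 0 ∧
      ∀ d, d < j - k → cur.getD d 0 = 0 := by
  induction cur generalizing k with
  | nil => simp [pvLeadB] at h
  | cons x xs ih =>
    rw [pvLeadB] at h
    split at h
    · have hjk : j = k := by simpa using h.symm
      subst hjk
      refine ⟨le_refl _, by simp, by simpa using ‹x ≠ 0›, ?_⟩
      intro d hd
      exact absurd hd (by omega)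
    · obtain ⟨h1, h2, h3, h4⟩ := ih h
      have hk : k + 1 ≤ j := h1
      have hx : x = 0 := by simpa using ‹¬ x ≠ 0›
      refine ⟨by omega, by simp; omega, ?_, ?_⟩
      · have e : j - k = (j - (k + 1)) + 1 := by omega
        rw [e, List.getD_cons_succ]
        exact h3
      · intro d hd
        cases d with
        | zero => simpa using hx
        | succ d' =>
          rw [List.getD_cons_succ]
          exact h4 d' (by omega)

lemma pvInsertB_mem (lead : Nat) (cur : List Int) (basis : List (Nat × List Int))
    (x : Nat × List Int) :
    x ∈ pvInsertB lead cur basis ↔ x = (lead, cur) ∨ x ∈ basis := by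
  induction basis with
  | nil => simp [pvInsertB]
  | cons pb t ih =>
    rw [pvInsertB]
    split
    · simp only [List.mem_cons, ih]
      tauto
    · simp

lemma pvInsertB_sorted (lead : Nat) (cur : List Int) (basis : List (Nat × List Int))
    (h : List.Pairwise (fun a b : Nat × List Int => a.1 < b.1) basis)
    (hne : ∀ pb ∈ basis, pb.1 ≠ lead) :
    List.Pairwise (fun a b : Nat × List Int => a.1 < b.1) (pvInsertB lead cur basis) := by
  induction basis with
  | nil => simp [pvInsertB]
  | cons pb t ih =>
    have hpc := List.pairwise_cons.1 h
    rw [pvInsertB]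
    split
    · rw [List.pairwise_cons]
      constructor
      · intro y hy
        rcases (pvInsertB_mem lead cur t y).1 hy with rfl | hy'
        · simpa using ‹pb.1 < lead›
        · exact hpc.1 y hy'
      · exact ih hpc.2 (fun qb hqb => hne qb (by simp [hqb]))
    · have hlt : lead < pb.1 := by
        have h1 : ¬ pb.1 < lead := ‹_›
        have h2 := hne pb (by simp)
        omega
      rw [List.pairwise_cons]
      constructor
      · intro y hy
        rcases List.mem_cons.1 hy with rfl | hy'
        · simpa using hlt
        · have := hpc.1 y hy'
          simp only []
          omega
      · exact h

lemma pvReduceB_zero {basis : List (Nat × List Int)} {cur : List Int}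
    (hz : ∀ x ∈ cur, x = 0) : pvReduceB basis cur = cur := by
  induction basis with
  | nil => rfl
  | cons pb t ih =>
    show List.foldl _ _ (pb :: t) = cur
    rw [List.foldl_cons, if_neg (by rw [pvZero_getD_any hz]; simp)]
    exact ih

lemma pvLeadB_zero : ∀ (cur : List Int), (∀ x ∈ cur, x = 0) → ∀ k, pvLeadB cur k = none
  | [], _, _ => rfl
  | x :: xs, hz, k => by
    rw [pvLeadB, if_neg (by simpa using hz x (by simp))]
    exact pvLeadB_zero xs (fun y hy => hz y (by simp [hy])) (k + 1)

lemma pvStepB_inv {n : Nat} {M : List (List Int)} {basis : List (Nat × List Int)}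
    (row : List Int) (hR : pvRREF n basis) (hS : pvSpanEq n (basis.map Prod.snd) M)
    (hM : ∀ r ∈ M, pvGoodRow n r)
    (hrowok : pvOKRow n (row.map (fun x => PySem.Int.band x 1))) :
    pvRREF n (pvStepB basis row) ∧
      pvSpanEq n ((pvStepB basis row).map Prod.snd)
        (M ++ [(row.map (fun x => PySem.Int.band x 1)).take n]) := by
  set cur0 := row.map (fun x => PySem.Int.band x 1) with hcur0
  rcases hrowok.2 with hlen | ⟨hl, hzz⟩
  case inr =>
    -- an all-zero (even) row: B skips it, and its truncation is the zero row
    have hred : pvReduceB basis cur0 = cur0 := pvReduceB_zero hzz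
    have hstep : pvStepB basis row = basis := by
      rw [pvStepB, ← hcur0, hred, pvLeadB_zero cur0 hzz 0]
    have htk : cur0.take n = pvZeroRow n := pvTake_zero hzz hl
    rw [hstep, htk]
    refine ⟨hR, ?_⟩
    have hgoodM : ∀ y ∈ M ++ [pvZeroRow n], pvGoodRow n y := by
      intro y hy
      rcases List.mem_append.1 hy with h' | h'
      · exact hM y h'
      · have : y = pvZeroRow n := by simpa using h'
        rw [this]
        exact pvZeroRow_good n
    apply pvSpanEq_of_members (pvRREF_good hR) hgoodM
    · intro x hx
      exact pvSpan_mono (fun r hr => List.mem_append_left _ hr)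
        ((hS x).1 (pvSpan_mem (pvRREF_good hR) hx))
    · intro y hy
      rcases List.mem_append.1 hy with h' | h'
      · exact (hS y).2 (pvSpan_mem hM h')
      · have : y = pvZeroRow n := by simpa using h'
        rw [this]
        exact pvSpan.zero
  case inl =>
  have hrow : pvGoodRow n cur0 := ⟨hlen, hrowok.1⟩
  rw [pvTake_id hlen]
  obtain ⟨s, hsspan, hcureq, hcurg, hcurz⟩ :=
    pvReduceB_go basis hR basis [] rfl cur0 hrow (by simp)
  set cur := pvReduceB basis cur0 with hcur
  have hcureq' : cur = pvXor cur0 s := hcureq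
  have hcurg2 : pvGoodRow n cur := hcurg
  have hcurz2 : ∀ pb ∈ basis, cur.getD pb.1 0 = 0 := hcurz
  have hcl : cur.length = n := hcurg.1
  have hsg : pvGoodRow n s := pvSpan_good (pvRREF_good hR) hsspan
  have hgoodM : ∀ y ∈ M ++ [cur0], pvGoodRow n y := by
    intro y hy
    rcases List.mem_append.1 hy with h' | h'
    · exact hM y h'
    · have : y = cur0 := by simpa using h'
      rw [this]
      exact hrow
  have hc0x : pvXor cur s = cur0 := by
    rw [hcureq']
    exact pvXor_cancel_right hrow hsg
  cases hlead : pvLeadB cur 0 with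
  | none =>
    have hstep : pvStepB basis row = basis := by
      rw [pvStepB, ← hcur0, ← hcur, hlead]
    rw [hstep]
    refine ⟨hR, ?_⟩
    have hallz : ∀ d, d < n → cur.getD d 0 = 0 := by
      intro d hd
      rcases Nat.lt_or_ge d cur.length with h' | h'
      · rw [List.getD_eq_getElem _ _ h']
        exact pvLeadB_none hlead _ (List.getElem_mem h')
      · rw [List.getD_eq_default _ _ h']
    have hczero : cur = pvZeroRow n := pvGood_allzero hcurg2 hallz
    have hcur0s : cur0 = s := by
      rw [← hc0x, hczero, pvXor_zeroL hsg]
    apply pvSpanEq_of_members (pvRREF_good hR) hgoodM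
    · intro x hx
      exact pvSpan_mono (fun r hr => List.mem_append_left _ hr)
        ((hS x).1 (pvSpan_mem (pvRREF_good hR) hx))
    · intro y hy
      rcases List.mem_append.1 hy with h' | h'
      · exact (hS y).2 (pvSpan_mem hM h')
      · have : y = cur0 := by simpa using h'
        rw [this, hcur0s]
        exact hsspan
  | some lead =>
    have hspec := pvLeadB_some hlead
    rw [Nat.sub_zero] at hspec
    obtain ⟨-, hlen, hbit, hlow⟩ := hspec
    have hleadn : lead < n := by omega
    have hbit1 : cur.getD lead 0 = 1 := (pvGood_getD01 hcurg2 lead).resolve_left hbit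
    have hleadne : ∀ pb ∈ basis, pb.1 ≠ lead := by
      intro pb hpb he
      exact hbit (he ▸ hcurz2 pb hpb)
    set upd := basis.map
      (fun pb => (pb.1, if pb.2.getD lead 0 ≠ 0 then pvXor pb.2 cur else pb.2)) with hupd
    set basis' := pvInsertB lead cur upd with hbasis'
    have hstep : pvStepB basis row = basis' := by
      rw [pvStepB, ← hcur0, ← hcur, hlead]
    have hmem' : ∀ pb ∈ basis', pb = (lead, cur) ∨
        ∃ qb ∈ basis, pb = (qb.1, if qb.2.getD lead 0 ≠ 0 then pvXor qb.2 cur else qb.2) := by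
      intro pb hpb
      rcases (pvInsertB_mem lead cur upd pb).1 hpb with h' | h'
      · exact Or.inl h'
      · right
        rw [hupd] at h'
        obtain ⟨qb, hqb, rfl⟩ := List.mem_map.1 h'
        exact ⟨qb, hqb, rfl⟩
    -- entries of an updated old row
    have hbgetD : ∀ qb ∈ basis, ∀ d : Nat,
        ((if qb.2.getD lead 0 ≠ 0 then pvXor qb.2 cur else qb.2) : List Int).getD d 0 =
          if qb.2.getD lead 0 ≠ 0 then PySem.Int.bxor (qb.2.getD d 0) (cur.getD d 0)
          else qb.2.getD d 0 := by
      intro qb hqb d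
      have hqg := (hR.2 qb hqb).2.1
      by_cases hb : qb.2.getD lead 0 ≠ 0
      · rw [if_pos hb, if_pos hb, pvXor_getD (by rw [hqg.1, hcl])]
      · rw [if_neg hb, if_neg hb]
    have hqlead : ∀ qb ∈ basis, qb.2.getD lead 0 ≠ 0 → qb.1 < lead := by
      intro qb hqb hb
      obtain ⟨hqn, hqg, hqpiv, hqlow, hqcross⟩ := hR.2 qb hqb
      have hne := hleadne qb hqb
      by_contra hge
      have : lead < qb.1 := by omega
      exact hb (hqlow lead this)
    have hRREF' : pvRREF n basis' := by
      constructor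
      · rw [hbasis']
        apply pvInsertB_sorted
        · rw [hupd, List.pairwise_map]
          exact hR.1
        · intro pb hpb
          rw [hupd] at hpb
          obtain ⟨qb, hqb, rfl⟩ := List.mem_map.1 hpb
          exact hleadne qb hqb
      · intro pb hpb
        rcases hmem' pb hpb with rfl | ⟨qb, hqb, rfl⟩
        · refine ⟨hleadn, hcurg2, hbit1, hlow, ?_⟩
          intro rb hrb hne
          rcases hmem' rb hrb with rfl | ⟨sb, hsb, rfl⟩
          · exact absurd rfl hne
          · exact hcurz2 sb hsb
        · obtain ⟨hqn, hqg, hqpiv, hqlow, hqcross⟩ := hR.2 qb hqb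
          have hgood' : pvGoodRow n
              (if qb.2.getD lead 0 ≠ 0 then pvXor qb.2 cur else qb.2) := by
            split
            · exact pvXor_good hqg hcurg2
            · exact hqg
          refine ⟨hqn, hgood', ?_, ?_, ?_⟩
          · rw [hbgetD qb hqb qb.1, hqpiv, hcurz2 qb hqb]
            split <;> decide
          · intro d hd
            rw [hbgetD qb hqb d, hqlow d hd]
            by_cases hb : qb.2.getD lead 0 ≠ 0
            · rw [if_pos hb, hlow d (by have := hqlead qb hqb hb; omega)]
              decide
            · rw [if_neg hb]
          · intro rb hrb hne
            rcases hmem' rb hrb with rfl | ⟨sb, hsb, rfl⟩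
            · show ((if qb.2.getD lead 0 ≠ 0 then pvXor qb.2 cur else qb.2) : List Int).getD
                  lead 0 = 0
              rw [hbgetD qb hqb lead, hbit1]
              by_cases hb : qb.2.getD lead 0 ≠ 0
              · rw [if_pos hb]
                have : qb.2.getD lead 0 = 1 := (pvGood_getD01 hqg lead).resolve_left hb
                rw [this]
                decide
              · rw [if_neg hb]
                exact not_ne_iff.1 hb
            · show ((if qb.2.getD lead 0 ≠ 0 then pvXor qb.2 cur else qb.2) : List Int).getD
                  sb.1 0 = 0
              rw [hbgetD qb hqb sb.1, hqcross sb hsb (by simpa using hne), hcurz2 sb hsb]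
              split <;> decide
    have hgoodNew : ∀ x ∈ basis'.map Prod.snd, pvGoodRow n x := pvRREF_good hRREF'
    have hcurNew : cur ∈ basis'.map Prod.snd :=
      List.mem_map.2 ⟨(lead, cur), (pvInsertB_mem lead cur upd _).2 (Or.inl rfl), rfl⟩
    have holdspan : ∀ x ∈ basis.map Prod.snd, pvSpan n (basis'.map Prod.snd) x := by
      intro x hx
      obtain ⟨qb, hqb, rfl⟩ := List.mem_map.1 hx
      have hqg := (hR.2 qb hqb).2.1
      have hbmem : (if qb.2.getD lead 0 ≠ 0 then pvXor qb.2 cur else qb.2) ∈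
          basis'.map Prod.snd := by
        refine List.mem_map.2 ⟨(qb.1, if qb.2.getD lead 0 ≠ 0 then pvXor qb.2 cur else qb.2),
          ?_, rfl⟩
        apply (pvInsertB_mem lead cur upd _).2
        right
        rw [hupd]
        exact List.mem_map.2 ⟨qb, hqb, rfl⟩
      by_cases hb : qb.2.getD lead 0 ≠ 0
      · rw [if_pos hb] at hbmem
        have h1 := pvSpan_xor hgoodNew (pvSpan_mem hgoodNew hbmem) (pvSpan_mem hgoodNew hcurNew)
        rwa [pvXor_cancel_right hqg hcurg2] at h1
      · rw [if_neg hb] at hbmem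
        exact pvSpan_mem hgoodNew hbmem
    rw [hstep]
    refine ⟨hRREF', ?_⟩
    apply pvSpanEq_of_members hgoodNew hgoodM
    · intro x hx
      have hcurM : pvSpan n (M ++ [cur0]) cur := by
        rw [hcureq']
        apply pvSpan_xor hgoodM
        · exact pvSpan_mem hgoodM (List.mem_append_right _ (by simp))
        · exact pvSpan_mono (fun r hr => List.mem_append_left _ hr) ((hS s).1 hsspan)
      obtain ⟨pb, hpb, rfl⟩ := List.mem_map.1 hx
      rcases hmem' pb hpb with rfl | ⟨qb, hqb, rfl⟩
      · exact hcurM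
      · have hqM : pvSpan n (M ++ [cur0]) qb.2 :=
          pvSpan_mono (fun r hr => List.mem_append_left _ hr)
            ((hS qb.2).1 (pvSpan_mem (pvRREF_good hR) (List.mem_map.2 ⟨qb, hqb, rfl⟩)))
        show pvSpan n (M ++ [cur0])
          ((qb.1, if qb.2.getD lead 0 ≠ 0 then pvXor qb.2 cur else qb.2).2)
        simp only []
        split
        · exact pvSpan_xor hgoodM hqM hcurM
        · exact hqM
    · intro y hy
      rcases List.mem_append.1 hy with h' | h'
      · exact pvSpan_trans hgoodNew holdspan ((hS y).2 (pvSpan_mem hM h'))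
      · have : y = cur0 := by simpa using h'
        rw [this, ← hc0x]
        apply pvSpan_xor hgoodNew (pvSpan_mem hgoodNew hcurNew)
        exact pvSpan_trans hgoodNew holdspan hsspan


-- ---------- folding B over all rows ----------
lemma pvFoldB_inv (n : Nat) (rows : List (List Int)) :
    ∀ (basis : List (Nat × List Int)) (M : List (List Int)),
    pvRREF n basis → pvSpanEq n (basis.map Prod.snd) M → (∀ r ∈ M, pvGoodRow n r) →
    (∀ r ∈ rows, pvOKRow n (r.map (fun x => PySem.Int.band x 1))) →
    pvRREF n (rows.foldl pvStepB basis) ∧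
      pvSpanEq n ((rows.foldl pvStepB basis).map Prod.snd)
        (M ++ rows.map (fun r => (r.map (fun x => PySem.Int.band x 1)).take n)) := by
  induction rows with
  | nil =>
    intro basis M h1 h2 _ _
    simpa using ⟨h1, h2⟩
  | cons r t ih =>
    intro basis M h1 h2 hM hrows
    have hstep := pvStepB_inv r h1 h2 hM (hrows r (by simp))
    have hM' : ∀ x ∈ M ++ [(r.map (fun x => PySem.Int.band x 1)).take n], pvGoodRow n x := by
      intro x hx
      rcases List.mem_append.1 hx with h' | h'
      · exact hM x h'
      · have : x = (r.map (fun x => PySem.Int.band x 1)).take n := by simpa using h'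
        rw [this]
        exact pvTake_good (hrows r (by simp))
    have := ih (pvStepB basis r) (M ++ [(r.map (fun x => PySem.Int.band x 1)).take n])
      hstep.1 hstep.2 hM' (fun x hx => hrows x (by simp [hx]))
    simpa [List.append_assoc] using this

-- ---------- assembling the final outputs ----------
lemma pvSpanEq_drop_zeros {n : Nat} {X Z M : List (List Int)}
    (hX : ∀ x ∈ X, pvGoodRow n x) (hZ : ∀ z ∈ Z, z = pvZeroRow n)
    (h : pvSpanEq n (X ++ Z) M) : pvSpanEq n X M := by
  have hXZ : ∀ x ∈ X ++ Z, pvGoodRow n x := by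
    intro x hx
    rcases List.mem_append.1 hx with h' | h'
    · exact hX x h'
    · rw [hZ x h']
      exact pvZeroRow_good n
  have hEq : pvSpanEq n X (X ++ Z) := by
    apply pvSpanEq_of_members hX hXZ
    · intro x hx
      exact pvSpan_mem hXZ (List.mem_append_left _ hx)
    · intro y hy
      rcases List.mem_append.1 hy with h' | h'
      · exact pvSpan_mem hX h'
      · rw [hZ y h']
        exact pvSpan.zero
  exact fun v => Iff.trans (hEq v) (h v)


theorem rref_f2_py_spec : Claim_equal_rref_f2_py := by
  intro matrix _ hpre
  unfold Spec_rref_f2_py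
  by_cases hm : matrix = []
  · simp [rref_f2_py, rref_f2_py_alt, hm]
  · set n := (matrix.headD []).length with hn
    set m01 := matrix.map (fun row => row.map (fun x => PySem.Int.band x 1)) with hm01
    have hm01ok : ∀ r ∈ m01, pvOKRow n r := by
      intro r hr
      rw [hm01] at hr
      obtain ⟨row, hrow, rfl⟩ := List.mem_map.1 hr
      obtain ⟨hge, hor⟩ := hpre row hrow
      constructor
      · intro x hx
        obtain ⟨y, _, rfl⟩ := List.mem_map.1 hx
        exact pv_band01 y
      · rcases hor with h' | h'
        · left
          rw [List.length_map, h', hn]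
        · right
          refine ⟨by rw [List.length_map, hn]; exact hge, ?_⟩
          intro x hx
          obtain ⟨y, hy, rfl⟩ := List.mem_map.1 hx
          exact h' y hy
    have hnc : (m01.headD []).length = n := by
      cases matrix with
      | nil => exact absurd rfl hm
      | cons h t => simp [hm01, hn]
    -- run the bisimulation of A with its functional model
    have hsim := pvLoopA_sim (List.range n) [] m01
    simp only [List.length_nil, Nat.zero_add, List.map_nil, List.nil_append] at hsim
    set F := pvLoopF (List.range n) ([], m01) with hF
    set M01t := m01.map (List.take n) with hM01t
    -- the invariant of the functional model
    have hinv0 : pvInvA n 0 M01t ([], m01) := by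
      refine ⟨⟨by simp, by simp⟩, by simp, ?_, ?_⟩
      · intro row hrow
        exact ⟨hm01ok row hrow, fun d hd => absurd hd (by omega)⟩
      · intro v
        simp only [List.map_nil, List.nil_append]
        rw [hM01t]
    have hinv : pvInvA n n M01t F := by
      rw [hF, List.range_eq_range']
      exact pvLoopF_inv n M01t n 0 (by omega) _ hinv0
    obtain ⟨hRf, _, hrestf, hspanf⟩ := hinv
    have hzent : ∀ z ∈ F.2, ∀ x ∈ z, x = 0 := by
      intro z hz
      exact pvOK_allzero (hrestf z hz).1 (hrestf z hz).2
    -- the surviving rows of A are exactly the rows of the model's basis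
    have hfilter : (F.1.map Prod.snd ++ F.2).filter (fun row => row.any (fun x => x != 0))
        = F.1.map Prod.snd := by
      rw [List.filter_append, List.filter_eq_self.2, List.filter_eq_nil_iff.2, List.append_nil]
      · intro z hz
        simp only [List.any_eq_true, bne_iff_ne, ne_eq, not_exists, not_and, not_not]
        intro x hx
        exact hzent z hz x hx
      · intro r hr
        obtain ⟨pb, hpb, rfl⟩ := List.mem_map.1 hr
        obtain ⟨hpn, hpg, hppiv, -, -⟩ := hRf.2 pb hpb
        have hlt : pb.1 < pb.2.length := by rw [hpg.1]; exact hpn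
        have : pb.2.getD pb.1 0 = pb.2[pb.1] := List.getD_eq_getElem _ _ hlt
        rw [this] at hppiv
        refine List.any_eq_true.2 ⟨pb.2[pb.1], List.getElem_mem hlt, ?_⟩
        rw [hppiv]
        decide
    -- B's invariant
    have hfold := pvFoldB_inv n matrix [] []
      ⟨by simp, by simp⟩ (fun v => by simp only [List.map_nil]) (by simp)
      (by
        intro r hr
        exact hm01ok (r.map (fun x => PySem.Int.band x 1)) (List.mem_map.2 ⟨r, hr, rfl⟩))
    rw [List.nil_append] at hfold
    set basisB := matrix.foldl pvStepB [] with hB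
    obtain ⟨hRb, hspanb⟩ := hfold
    have hspanb' : pvSpanEq n (basisB.map Prod.snd) M01t := by
      have he : M01t = matrix.map (fun r => (r.map (fun x => PySem.Int.band x 1)).take n) := by
        rw [hM01t, hm01, List.map_map]
        rfl
      rw [he]
      exact hspanb
    -- both are the reduced row-echelon basis of the same span: they coincide
    have hzeroT : ∀ z ∈ F.2.map (List.take n), z = pvZeroRow n := by
      intro z hz
      obtain ⟨r, hr, rfl⟩ := List.mem_map.1 hz
      exact pvTake_zero (hzent r hr) (pvOK_len (hrestf r hr).1)
    have hspanDone : pvSpanEq n (F.1.map Prod.snd) M01t :=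
      pvSpanEq_drop_zeros (pvRREF_good hRf) hzeroT hspanf
    have hspanBoth : pvSpanEq n (F.1.map Prod.snd) (basisB.map Prod.snd) := by
      intro v
      exact Iff.trans (hspanDone v) ((hspanb' v).symm)
    have hFB : F.1 = basisB := pvRREF_unique hRf hRb hspanBoth
    -- unfold both ports and compare
    show rref_f2_py matrix = rref_f2_py_alt matrix
    rw [rref_f2_py, rref_f2_py_alt, if_neg hm, if_neg hm]
    simp only [← hm01, ← hB, hnc, hsim, hfilter]
    rw [hFB]
    simp
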